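-- pv_equiv track=rewrite | github.com/co-re-study/co-re-study | 34/합승 택시 요금/윤성운.py | solution
-- ===== SOURCE A (Python) =====
-- import heapq
--
-- def solution(n, s, a, b, fares):
--
--     # 다익스트라
--     def dijk(start, distance):
--         distance[start] = 0
--         heap = [(0, start)]
--         visited = set()
--
--         while heap:
--             dist, current = heapq.heappop(heap)
--             if current in visited:
--                 continue
--             for destination_info in adj_list[current]:
--                 destination, cost = destination_info
--                 if distance[current] + cost < distance[destination]:
--                     distance[destination] = distance[current] + cost
--                     heapq.heappush(heap, (distance[destination], destination))
--
--     adj_list = [[] for _ in range(n + 1)]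
--     INF = 987654321
--     distance_A = [INF] * (n + 1)
--     distance_B = [INF] * (n + 1)
--     distance_total = [INF] * (n + 1)
--
--     for fare in fares:
--         adj_list[fare[0]].append((fare[1], fare[2]))
--         adj_list[fare[1]].append((fare[0], fare[2]))
--
--     dijk(a, distance_A) # A에서 각 노드까지의 최소 가중치 구하기
--     dijk(b, distance_B) # B에서 각 노드까지의 최소 가중치 구하기
--     dijk(s, distance_total) # S에서 각 노드까지의 최소 가중치 구하기
--     answer = INF
--
--     # node: A와 B가 헤어질 노드
--     for node in range(1, n + 1):
--         # 함께 간 거리 + A 혼자 간 거리 + B 혼자 간 거리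
--         distance = distance_total[node] + distance_A[node] + distance_B[node]
--         if distance < answer:
--             answer = distance
--
--     return answer
-- ===== SOURCE B (Python) =====
-- def solution(n, s, a, b, fares):
--     # Floyd-Warshall on an (n+1)x(n+1) matrix instead of three heap Dijkstras.
--     INF = 987654321
--     size = n + 1
--     dist = [[0 if i == j else INF for j in range(size)] for i in range(size)]
--     for fare in fares:
--         u, v, c = fare[0], fare[1], fare[2]
--         if c < dist[u][v]:
--             dist[u][v] = c
--             dist[v][u] = c
--     for k in range(size):
--         dist = [[min(dist[i][j], dist[i][k] + dist[k][j]) for j in range(size)]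
--                 for i in range(size)]
--     ans = INF
--     for node in range(1, size):
--         ans = min(ans, dist[s][node] + dist[a][node] + dist[b][node])
--     return ans
-- ===== Notes on version B (the rewrite author's own statement) =====
-- stated objective: alternative
-- what changed: Replaces the three heap-based Dijkstra runs over an adjacency list by one Floyd-Warshall all-pairs distance matrix (min-combined parallel edges at init, out-of-place relaxation rounds), then scans the three matrix rows for the best meeting node.
-- outside the precondition, e.g. on solution(3, 1, 1, 1, [[2, 3, -5]]): A returns 0, B returns 0
import Mathlib
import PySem

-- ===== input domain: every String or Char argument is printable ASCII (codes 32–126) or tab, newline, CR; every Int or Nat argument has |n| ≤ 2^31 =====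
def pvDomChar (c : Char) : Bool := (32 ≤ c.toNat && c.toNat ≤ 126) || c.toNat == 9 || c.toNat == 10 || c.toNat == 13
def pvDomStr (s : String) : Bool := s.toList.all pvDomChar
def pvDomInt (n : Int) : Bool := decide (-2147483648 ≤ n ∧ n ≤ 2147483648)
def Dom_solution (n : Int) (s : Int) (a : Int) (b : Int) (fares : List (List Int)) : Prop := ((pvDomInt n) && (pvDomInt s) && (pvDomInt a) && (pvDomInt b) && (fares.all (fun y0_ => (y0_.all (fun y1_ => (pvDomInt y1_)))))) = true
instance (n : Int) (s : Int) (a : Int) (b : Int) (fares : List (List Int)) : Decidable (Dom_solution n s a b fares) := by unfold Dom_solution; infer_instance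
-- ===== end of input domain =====

-- B replaces A's three heap Dijkstras by one Floyd-Warshall matrix; equivalence is proved on the
-- natural domain (node labels in range, nonnegative fares). A mutates nothing observable.

-- ===== PORT A =====
-- heapq is ported as a min-extracting priority queue on a plain list: heappop removes the
-- lexicographically smallest (dist, node) pair, exactly the pair Python's heappop returns.
def pvPairLtb (x y : Int × Int) : Bool := x.1 < y.1 || (x.1 == y.1 && x.2 < y.2)

def pvPopMin : List (Int × Int) → Option ((Int × Int) × List (Int × Int))
  | [] => none
  | x :: xs =>
    match pvPopMin xs with
    | none => some (x, [])
    | some (m, rest) => if pvPairLtb m x then some (m, x :: rest) else some (x, xs)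

-- distance[i] / adj_list[i] (indices are in range on every admitted input; exact there)
def pvDget (xs : List Int) (i : Int) : Int := PySem.List.pyGetD xs i 0
def pvAget (xs : List (List (Int × Int))) (i : Int) : List (Int × Int) := PySem.List.pyGetD xs i []

-- body of A's inner for-loop over adj_list[current]
def pvRelax (current : Int) (st : List Int × List (Int × Int)) (e : Int × Int) : List Int × List (Int × Int) :=
  if pvDget st.1 current + e.2 < pvDget st.1 e.1 then
    (PySem.List.pySetD st.1 e.1 (pvDget st.1 current + e.2),
     st.2 ++ [(pvDget st.1 current + e.2, e.1)])
  else st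

-- A's while-loop; fuel is only a termination guard, proved sufficient on admitted inputs
def pvDijkLoop (adj : List (List (Int × Int))) : Nat → List Int → List (Int × Int) → PySem.Set Int → List Int
  | 0, dist, _, _ => dist
  | fuel+1, dist, heap, visited =>
    match pvPopMin heap with
    | none => dist
    | some ((_, current), heap') =>
      if PySem.Set.contains visited current then pvDijkLoop adj fuel dist heap' visited
      else
        let st := (pvAget adj current).foldl (pvRelax current) (dist, heap')
        pvDijkLoop adj fuel st.1 st.2 visited

def pvDijk (adj : List (List (Int × Int))) (start : Int) (distance : List Int) : List Int :=
  let distance := PySem.List.pySetD distance start 0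
  pvDijkLoop adj ((distance.map Int.toNat).sum + 2) distance [(0, start)] PySem.Set.empty

def pvBuildAdj (n : Int) (fares : List (List Int)) : List (List (Int × Int)) :=
  fares.foldl (fun adj fare =>
    let adj := PySem.List.pySetD adj (pvDget fare 0)
                 (pvAget adj (pvDget fare 0) ++ [(pvDget fare 1, pvDget fare 2)])
    PySem.List.pySetD adj (pvDget fare 1)
                 (pvAget adj (pvDget fare 1) ++ [(pvDget fare 0, pvDget fare 2)]))
    (List.replicate (n+1).toNat [])

def solution (n : Int) (s : Int) (a : Int) (b : Int) (fares : List (List Int)) : Int :=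
  let adj := pvBuildAdj n fares
  let distanceA := pvDijk adj a (List.replicate (n+1).toNat 987654321)
  let distanceB := pvDijk adj b (List.replicate (n+1).toNat 987654321)
  let distanceT := pvDijk adj s (List.replicate (n+1).toNat 987654321)
  (PySem.List.pyRange 1 (n+1) 1).foldl
    (fun answer node =>
      if pvDget distanceT node + pvDget distanceA node + pvDget distanceB node < answer then
        pvDget distanceT node + pvDget distanceA node + pvDget distanceB node
      else answer) 987654321

-- ===== PORT B =====
def pvMget (g : List (List Int)) (i j : Int) : Int := pvDget (PySem.List.pyGetD g i []) j
def pvMset (g : List (List Int)) (i j x : Int) : List (List Int) :=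
  PySem.List.pySetD g i (PySem.List.pySetD (PySem.List.pyGetD g i []) j x)

-- one out-of-place Floyd-Warshall round (the matrix comprehension of Source B)
def pvFWRound (size : Nat) (g : List (List Int)) (k : Nat) : List (List Int) :=
  (List.range size).map (fun (i : Nat) => (List.range size).map (fun (j : Nat) =>
    min (pvMget g (i : Int) (j : Int)) (pvMget g (i : Int) (k : Int) + pvMget g (k : Int) (j : Int))))

def solution_alt (n : Int) (s : Int) (a : Int) (b : Int) (fares : List (List Int)) : Int :=
  let size := (n + 1).toNat
  let g0 := (List.range size).map (fun i => (List.range size).map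
              (fun j => if i = j then (0 : Int) else 987654321))
  let g1 := fares.foldl (fun g fare =>
      if pvDget fare 2 < pvMget g (pvDget fare 0) (pvDget fare 1) then
        pvMset (pvMset g (pvDget fare 0) (pvDget fare 1) (pvDget fare 2))
               (pvDget fare 1) (pvDget fare 0) (pvDget fare 2)
      else g) g0
  let gF := (List.range size).foldl (pvFWRound size) g1
  (PySem.List.pyRange 1 (n+1) 1).foldl
    (fun ans node => min ans (pvMget gF s node + pvMget gF a node + pvMget gF b node)) 987654321

-- ===== PRECONDITION & SPEC =====
-- Pre_ excludes only: inputs where A raises (n < 0; s,a,b or a fare endpoint outside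
-- [-(n+1), n], or a fare list shorter than 3) and inputs with negative fare costs, on which
-- A's relaxation loop fails to terminate whenever a negative edge is reachable (every
-- negative edge closes a negative cycle in this symmetrized graph).
-- Negative in-range labels are admitted (both programs wrap them identically).
def Pre_solution (n : Int) (s : Int) (a : Int) (b : Int) (fares : List (List Int)) : Prop :=
  0 ≤ n ∧ -(n+1) ≤ s ∧ s ≤ n ∧ -(n+1) ≤ a ∧ a ≤ n ∧ -(n+1) ≤ b ∧ b ≤ n ∧
  ∀ f ∈ fares, 3 ≤ f.length ∧
    -(n+1) ≤ f.getD 0 0 ∧ f.getD 0 0 ≤ n ∧ -(n+1) ≤ f.getD 1 0 ∧ f.getD 1 0 ≤ n ∧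
    0 ≤ f.getD 2 0
instance (n : Int) (s : Int) (a : Int) (b : Int) (fares : List (List Int)) : Decidable (Pre_solution n s a b fares) := by unfold Pre_solution; infer_instance

def pvWitness_solution : Int × Int × Int × Int × List (List Int) := (4, 1, 2, 3, [[1,2,3],[2,3,2],[1,4,1],[4,3,1]])

def Spec_solution (n : Int) (s : Int) (a : Int) (b : Int) (fares : List (List Int)) (out : Int) : Prop := out = solution_alt n s a b fares
instance (n : Int) (s : Int) (a : Int) (b : Int) (fares : List (List Int)) (out : Int) : Decidable (Spec_solution n s a b fares out) := by unfold Spec_solution; infer_instance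

-- ===== CLAIM (what is proved, stated in full; the proofs are below) =====
def Claim_equal_solution : Prop := ∀ (n : Int) (s : Int) (a : Int) (b : Int) (fares : List (List Int)), Dom_solution n s a b fares → Pre_solution n s a b fares → Spec_solution n s a b fares (solution n s a b fares)

-- ===== LEMMAS AND PROOFS =====

-- ===== generic helper lemmas =====

theorem pvGetD_nonneg_lt {α : Type} (xs : List α) (d : α) (j : Int) (h0 : 0 ≤ j)
    (hl : j < xs.length) : PySem.List.pyGetD xs j d = xs[j.toNat]'(by omega) :=
  PySem.List.pyGetD_eq_getElem xs d h0 hl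

theorem pvGetD_oob {α : Type} (xs : List α) (d : α) (j : Int)
    (hl : (xs.length : Int) ≤ j) : PySem.List.pyGetD xs j d = d := by
  have : PySem.List.pyGet? xs j = none := by
    rw [PySem.List.pyGet?_eq_none_iff]
    simp [PySem.Raise.InRange]; omega
  simp [PySem.List.pyGetD, this]

theorem pvGetD_setD {α : Type} (xs : List α) (d : α) (i j : Int) (x : α)
    (hi : 0 ≤ i) (hil : i < xs.length) (hj : 0 ≤ j) :
    PySem.List.pyGetD (PySem.List.pySetD xs i x) j d = if j = i then x else PySem.List.pyGetD xs j d := by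
  rw [PySem.List.pySetD_of_nonneg _ _ hi]
  by_cases hjl : j < xs.length
  · rw [pvGetD_nonneg_lt _ _ _ hj (by simpa using hjl), pvGetD_nonneg_lt _ _ _ hj hjl]
    rw [List.getElem_set]
    by_cases h : j = i
    · simp [h]
    · have : i.toNat ≠ j.toNat := by omega
      simp [this, h]
  · have h1 : (xs.length : Int) ≤ j := by omega
    rw [pvGetD_oob _ _ _ (by simpa using h1), pvGetD_oob _ _ _ h1]
    have : j ≠ i := by omega
    simp [this]

theorem pvDget_set (dist : List Int) (i j x : Int) (hi : 0 ≤ i) (hil : i < dist.length)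
    (hj : 0 ≤ j) : pvDget (PySem.List.pySetD dist i x) j = if j = i then x else pvDget dist j :=
  pvGetD_setD dist 0 i j x hi hil hj

theorem pvSetD_length {α : Type} (xs : List α) (i : Int) (x : α) :
    (PySem.List.pySetD xs i x).length = xs.length := by
  simp [PySem.List.length_pySetD]

theorem pvSum_set (l : List Int) (k : Nat) (x : Int) (hk : k < l.length) :
    (l.set k x).sum = l.sum + x - l[k] := by
  induction l generalizing k with
  | nil => simp at hk
  | cons y t ih =>
    cases k with
    | zero => simp [List.set]; ring
    | succ k =>
      simp only [List.set, List.sum_cons, List.getElem_cons_succ]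
      rw [ih k (by simpa using hk)]; ring

theorem pvSum_le_toNatSum (l : List Int) : l.sum ≤ ((l.map Int.toNat).sum : Int) := by
  induction l with
  | nil => simp
  | cons x t ih =>
    simp only [List.map_cons, List.sum_cons]
    have h1 : x ≤ (x.toNat : Int) := Int.self_le_toNat x
    rw [Nat.cast_add]
    omega

-- pvPopMin returns an element and a permutation-complement
theorem pvPopMin_none (h : List (Int × Int)) : pvPopMin h = none ↔ h = [] := by
  cases h with
  | nil => simp [pvPopMin]
  | cons x xs =>
    simp only [pvPopMin]
    cases hx : pvPopMin xs with
    | none => simp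
    | some p => cases p with | mk m rest => by_cases hlt : pvPairLtb m x <;> simp [hlt]

theorem pvPopMin_perm (h : List (Int × Int)) (e : Int × Int) (rest : List (Int × Int))
    (hp : pvPopMin h = some (e, rest)) : h.Perm (e :: rest) := by
  induction h generalizing e rest with
  | nil => simp [pvPopMin] at hp
  | cons x xs ih =>
    simp only [pvPopMin] at hp
    cases hx : pvPopMin xs with
    | none =>
      rw [hx] at hp
      have : xs = [] := (pvPopMin_none xs).mp hx
      subst this
      simp at hp
      simp [hp.1, hp.2]
    | some p =>
      cases p with
      | mk m mrest =>
        rw [hx] at hp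
        by_cases hlt : pvPairLtb m x
        · simp [hlt] at hp
          obtain ⟨he, hr⟩ := hp
          subst he; subst hr
          have h1 := ih m mrest hx
          exact (h1.cons x).trans (List.Perm.swap m x mrest)
        · simp [hlt] at hp
          obtain ⟨he, hr⟩ := hp
          subst he; subst hr
          exact List.Perm.refl _

theorem pvSetEmpty_contains (x : Int) : PySem.Set.contains (PySem.Set.empty : PySem.Set Int) x = false := by
  simp [PySem.Set.contains, PySem.Set.empty]

-- ===== edges and walks =====

def pvE (fares : List (List Int)) (u v c : Int) : Prop :=
  ∃ f ∈ fares, ((f.getD 0 0 = u ∧ f.getD 1 0 = v) ∨ (f.getD 0 0 = v ∧ f.getD 1 0 = u)) ∧ f.getD 2 0 = c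

-- walks in the symmetrized fare graph; the list is the sequence of interior vertices
inductive pvWalk (fares : List (List Int)) : Int → List Int → Int → Int → Prop
  | single {u v c : Int} : pvE fares u v c → pvWalk fares u [] v c
  | cons {u x v c d : Int} {m : List Int} :
      pvE fares u x c → pvWalk fares x m v d → pvWalk fares u (x :: m) v (c + d)

def pvFB (n : Int) (fares : List (List Int)) : Prop :=
  ∀ f ∈ fares, 3 ≤ f.length ∧
    0 ≤ f.getD 0 0 ∧ f.getD 0 0 ≤ n ∧ 0 ≤ f.getD 1 0 ∧ f.getD 1 0 ≤ n ∧ 0 ≤ f.getD 2 0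

theorem pvE_symm {fares : List (List Int)} {u v c : Int} (h : pvE fares u v c) : pvE fares v u c := by
  obtain ⟨f, hf, hd, hc⟩ := h
  exact ⟨f, hf, by tauto, hc⟩

theorem pvE_bounds {n : Int} {fares : List (List Int)} (hfb : pvFB n fares) {u v c : Int}
    (h : pvE fares u v c) : (0 ≤ u ∧ u ≤ n) ∧ (0 ≤ v ∧ v ≤ n) ∧ 0 ≤ c := by
  obtain ⟨f, hf, hd, hc⟩ := h
  have := hfb f hf
  rcases hd with ⟨h1, h2⟩ | ⟨h1, h2⟩ <;> subst h1 <;> subst h2 <;> subst hc <;> tauto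

theorem pvWalk_bounds {n : Int} {fares : List (List Int)} (hfb : pvFB n fares)
    {u v c : Int} {m : List Int} (h : pvWalk fares u m v c) :
    (0 ≤ u ∧ u ≤ n) ∧ (0 ≤ v ∧ v ≤ n) ∧ (∀ x ∈ m, 0 ≤ x ∧ x ≤ n) ∧ 0 ≤ c := by
  induction h with
  | single he => have := pvE_bounds hfb he; simp_all
  | cons he _ ih =>
    have := pvE_bounds hfb he
    refine ⟨by tauto, by tauto, ?_, by omega⟩
    intro x hx
    rcases List.mem_cons.mp hx with h | h
    · subst h; tauto
    · exact ih.2.2.1 x h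

theorem pvWalk_append {fares : List (List Int)} {u x v c1 c2 : Int} {m1 m2 : List Int}
    (h1 : pvWalk fares u m1 x c1) (h2 : pvWalk fares x m2 v c2) :
    pvWalk fares u (m1 ++ x :: m2) v (c1 + c2) := by
  induction h1 with
  | single he => exact pvWalk.cons he h2
  | cons he hw ih =>
    rw [List.cons_append, add_assoc]
    exact pvWalk.cons he (ih h2)

theorem pvWalk_snoc {fares : List (List Int)} {u x v c1 c2 : Int} {m : List Int}
    (h1 : pvWalk fares u m x c1) (h2 : pvE fares x v c2) :
    pvWalk fares u (m ++ [x]) v (c1 + c2) :=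
  pvWalk_append h1 (pvWalk.single h2)

theorem pvWalk_split {fares : List (List Int)} {u v c x : Int} {m1 m2 : List Int}
    (h : pvWalk fares u (m1 ++ x :: m2) v c) :
    ∃ c1 c2, pvWalk fares u m1 x c1 ∧ pvWalk fares x m2 v c2 ∧ c = c1 + c2 := by
  induction m1 generalizing u c with
  | nil =>
    cases h with
    | cons he hw => exact ⟨_, _, pvWalk.single he, hw, rfl⟩
  | cons y t ih =>
    cases h with
    | cons he hw =>
      obtain ⟨c1, c2, hw1, hw2, hc⟩ := ih hw
      exact ⟨_, _, pvWalk.cons he hw1, hw2, by omega⟩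

theorem pvMem_split_last {x : Int} {m : List Int} (h : x ∈ m) :
    ∃ m1 m2, m = m1 ++ x :: m2 ∧ x ∉ m2 := by
  induction m with
  | nil => simp at h
  | cons y t ih =>
    by_cases hx : x ∈ t
    · obtain ⟨m1, m2, he, hn⟩ := ih hx
      exact ⟨y :: m1, m2, by simp [he], hn⟩
    · have : x = y := by rcases List.mem_cons.mp h with h | h; exact h; exact absurd h hx
      subst this
      exact ⟨[], t, rfl, hx⟩

-- ===== negative-label (wraparound) normalization for s, a, b =====

def pvNorm (n x : Int) : Int := if x < 0 then x + (n+1) else x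

theorem pvIdx_wrap (len : Nat) (i : Int) (h1 : -(len : Int) ≤ i) (h2 : i < 0) :
    PySem.List.pyIdx? len i = PySem.List.pyIdx? len (i + len) := by
  simp only [PySem.List.pyIdx?]
  rw [if_neg (by omega), if_pos h1, if_pos (by omega), if_pos (by omega)]
  congr 1
  omega

theorem pvGetD_wrap {α : Type} (xs : List α) (d : α) (i : Int)
    (h1 : -(xs.length : Int) ≤ i) (h2 : i < 0) :
    PySem.List.pyGetD xs i d = PySem.List.pyGetD xs (i + xs.length) d := by
  simp only [PySem.List.pyGetD, PySem.List.pyGet?, pvIdx_wrap xs.length i h1 h2]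

theorem pvSetD_wrap {α : Type} (xs : List α) (v : α) (i : Int)
    (h1 : -(xs.length : Int) ≤ i) (h2 : i < 0) :
    PySem.List.pySetD xs i v = PySem.List.pySetD xs (i + xs.length) v := by
  simp only [PySem.List.pySetD, PySem.List.pySet?, pvIdx_wrap xs.length i h1 h2]

theorem pvRelax_len (cur : Int) (st : List Int × List (Int × Int)) (e : Int × Int) :
    (pvRelax cur st e).1.length = st.1.length := by
  rw [pvRelax]
  split_ifs
  · exact pvSetD_length _ _ _
  · rfl

theorem pvFoldRelax_wrap (N : Nat) (cur : Int) (h1 : -(N : Int) ≤ cur) (h2 : cur < 0) :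
    ∀ (L : List (Int × Int)) (st : List Int × List (Int × Int)), st.1.length = N →
      L.foldl (pvRelax cur) st = L.foldl (pvRelax (cur + N)) st := by
  intro L
  induction L with
  | nil => intro st _; rfl
  | cons e t ih =>
    intro st hlen
    have hd : pvDget st.1 cur = pvDget st.1 (cur + N) := by
      have := pvGetD_wrap st.1 0 cur (by rw [hlen]; omega) h2
      rw [hlen] at this
      exact this
    have hstep : pvRelax cur st e = pvRelax (cur + N) st e := by
      rw [pvRelax, pvRelax, hd]
    simp only [List.foldl_cons]
    rw [hstep]
    exact ih _ (by rw [pvRelax_len]; exact hlen)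

theorem pvDijkLoop_one (adj : List (List (Int × Int))) (fuel : Nat) (dist : List Int)
    (x : Int × Int) :
    pvDijkLoop adj (fuel+1) dist [x] PySem.Set.empty =
      pvDijkLoop adj fuel ((pvAget adj x.2).foldl (pvRelax x.2) (dist, [])).1
        ((pvAget adj x.2).foldl (pvRelax x.2) (dist, [])).2 PySem.Set.empty := by
  simp only [pvDijkLoop, pvPopMin, pvSetEmpty_contains, Bool.false_eq_true, if_false]

theorem pvDijk_wrap (adj : List (List (Int × Int))) (n : Int) (hn : 0 ≤ n)
    (hadjlen : adj.length = (n+1).toNat) (start : Int)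
    (h1 : -(n+1) ≤ start) (h2 : start < 0) :
    pvDijk adj start (List.replicate (n+1).toNat 987654321) =
      pvDijk adj (start + (n+1)) (List.replicate (n+1).toNat 987654321) := by
  have hNI : (((n+1).toNat : Nat) : Int) = n + 1 := Int.toNat_of_nonneg (by omega)
  have hlen : (List.replicate (n+1).toNat (987654321 : Int)).length = (n+1).toNat := by simp
  have hd0 : PySem.List.pySetD (List.replicate (n+1).toNat (987654321 : Int)) start 0 =
      PySem.List.pySetD (List.replicate (n+1).toNat (987654321 : Int)) (start + (n+1)) 0 := by
    have := pvSetD_wrap (List.replicate (n+1).toNat (987654321 : Int)) 0 start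
      (by rw [hlen]; omega) h2
    rw [hlen, hNI] at this
    exact this
  rw [pvDijk, pvDijk, ← hd0]
  set d0 := PySem.List.pySetD (List.replicate (n+1).toNat (987654321 : Int)) start 0 with hd0def
  have hd0len : d0.length = (n+1).toNat := by rw [hd0def, pvSetD_length]; exact hlen
  have hfuel : (d0.map Int.toNat).sum + 2 = ((d0.map Int.toNat).sum + 1) + 1 := rfl
  rw [hfuel, pvDijkLoop_one, pvDijkLoop_one]
  have hAg : pvAget adj start = pvAget adj (start + (n+1)) := by
    have := pvGetD_wrap adj [] start (by rw [hadjlen]; omega) h2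
    rw [hadjlen, hNI] at this
    exact this
  have hfold : (pvAget adj start).foldl (pvRelax start) (d0, []) =
      (pvAget adj (start + (n+1))).foldl (pvRelax (start + (n+1))) (d0, []) := by
    rw [hAg]
    have := pvFoldRelax_wrap (n+1).toNat start (by omega) h2
      (pvAget adj (start + (n+1))) (d0, []) hd0len
    rw [hNI] at this
    exact this
  rw [hfold]

theorem pvMget_wrap (g : List (List Int)) (n : Int) (hn : 0 ≤ n)
    (hlen : g.length = (n+1).toNat) (i j : Int) (h1 : -(n+1) ≤ i) (h2 : i < 0) :
    pvMget g i j = pvMget g (i + (n+1)) j := by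
  have hNI : (((n+1).toNat : Nat) : Int) = n + 1 := Int.toNat_of_nonneg (by omega)
  have := pvGetD_wrap g [] i (by rw [hlen]; omega) h2
  rw [hlen, hNI] at this
  rw [pvMget, this, pvMget]


-- ===== normalized-label machinery for negative fare endpoints =====

theorem pvNorm_nonneg (n x : Int) (h1 : -(n+1) ≤ x) (h2 : x ≤ n) :
    0 ≤ pvNorm n x ∧ pvNorm n x ≤ n := by
  unfold pvNorm; split_ifs <;> omega

theorem pvNorm_eq_self (n x : Int) (h : 0 ≤ x) : pvNorm n x = x := by
  unfold pvNorm; rw [if_neg (by omega)]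

theorem pvDget_norm (n : Int) (hn : 0 ≤ n) (dist : List Int)
    (hlen : dist.length = (n+1).toNat) (x : Int) (h1 : -(n+1) ≤ x) (_h2 : x ≤ n) :
    pvDget dist x = pvDget dist (pvNorm n x) := by
  unfold pvNorm
  split_ifs with h
  · have hNI : (((n+1).toNat : Nat) : Int) = n + 1 := Int.toNat_of_nonneg (by omega)
    have := pvGetD_wrap dist 0 x (by rw [hlen]; omega) h
    rw [hlen, hNI] at this
    exact this
  · rfl

theorem pvSetD_norm {α : Type} (n : Int) (hn : 0 ≤ n) (xs : List α) (v : α)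
    (hlen : xs.length = (n+1).toNat) (x : Int) (h1 : -(n+1) ≤ x) (_h2 : x ≤ n) :
    PySem.List.pySetD xs x v = PySem.List.pySetD xs (pvNorm n x) v := by
  unfold pvNorm
  split_ifs with h
  · have hNI : (((n+1).toNat : Nat) : Int) = n + 1 := Int.toNat_of_nonneg (by omega)
    have := pvSetD_wrap xs v x (by rw [hlen]; omega) h
    rw [hlen, hNI] at this
    exact this
  · rfl

theorem pvAget_norm (n : Int) (hn : 0 ≤ n) (adj : List (List (Int × Int)))
    (hlen : adj.length = (n+1).toNat) (x : Int) (h1 : -(n+1) ≤ x) (_h2 : x ≤ n) :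
    pvAget adj x = pvAget adj (pvNorm n x) := by
  unfold pvNorm
  split_ifs with h
  · have hNI : (((n+1).toNat : Nat) : Int) = n + 1 := Int.toNat_of_nonneg (by omega)
    have := pvGetD_wrap adj [] x (by rw [hlen]; omega) h
    rw [hlen, hNI] at this
    exact this
  · rfl

-- normalized fares: endpoints mapped into [0, n]
def pvNF (n : Int) (fares : List (List Int)) : List (List Int) :=
  fares.map (fun f => [pvNorm n (f.getD 0 0), pvNorm n (f.getD 1 0), f.getD 2 0])

def pvFBraw (n : Int) (fares : List (List Int)) : Prop :=
  ∀ f ∈ fares, 3 ≤ f.length ∧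
    -(n+1) ≤ f.getD 0 0 ∧ f.getD 0 0 ≤ n ∧ -(n+1) ≤ f.getD 1 0 ∧ f.getD 1 0 ≤ n ∧
    0 ≤ f.getD 2 0

theorem pvFB_NF (n : Int) (fares : List (List Int)) (h : pvFBraw n fares) :
    pvFB n (pvNF n fares) := by
  intro f' hf'
  obtain ⟨f, hf, rfl⟩ := List.mem_map.mp hf'
  obtain ⟨h1, h2, h3, h4, h5, h6⟩ := h f hf
  have n0 := pvNorm_nonneg n (f.getD 0 0) h2 h3
  have n1 := pvNorm_nonneg n (f.getD 1 0) h4 h5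
  refine ⟨by simp, ?_⟩
  simp only [List.getD_cons_zero, List.getD_cons_succ]
  exact ⟨n0.1, n0.2, n1.1, n1.2, h6⟩

theorem pvE_NF (n : Int) (fares : List (List Int)) (u v c : Int) :
    pvE (pvNF n fares) u v c ↔
      ∃ f ∈ fares, ((pvNorm n (f.getD 0 0) = u ∧ pvNorm n (f.getD 1 0) = v) ∨
        (pvNorm n (f.getD 0 0) = v ∧ pvNorm n (f.getD 1 0) = u)) ∧ f.getD 2 0 = c := by
  constructor
  · rintro ⟨f', hf', hd, hc⟩
    obtain ⟨f, hf, rfl⟩ := List.mem_map.mp hf'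
    simp only [List.getD_cons_zero, List.getD_cons_succ] at hd hc
    exact ⟨f, hf, hd, hc⟩
  · rintro ⟨f, hf, hd, hc⟩
    refine ⟨[pvNorm n (f.getD 0 0), pvNorm n (f.getD 1 0), f.getD 2 0],
      List.mem_map.mpr ⟨f, hf, rfl⟩, ?_⟩
    simp only [List.getD_cons_zero, List.getD_cons_succ]
    exact ⟨hd, hc⟩

-- the label-normalized shadow of a heap / adjacency row
def pvSig (n : Int) (h : List (Int × Int)) : List (Int × Int) :=
  h.map (fun e => (e.1, pvNorm n e.2))

def pvSigL (n : Int) (L : List (Int × Int)) : List (Int × Int) :=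
  L.map (fun e => (pvNorm n e.1, e.2))

theorem pvFold_sig (n : Int) (hn : 0 ≤ n) (cur : Int) :
    ∀ (L : List (Int × Int)) (st : List Int × List (Int × Int)),
      st.1.length = (n+1).toNat → (∀ vc ∈ L, -(n+1) ≤ vc.1 ∧ vc.1 ≤ n) →
      (L.foldl (pvRelax cur) st).1 = ((pvSigL n L).foldl (pvRelax cur) (st.1, pvSig n st.2)).1 ∧
      pvSig n (L.foldl (pvRelax cur) st).2 =
        ((pvSigL n L).foldl (pvRelax cur) (st.1, pvSig n st.2)).2 := by
  intro L
  induction L with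
  | nil => intro st _ _; exact ⟨rfl, rfl⟩
  | cons e t ih =>
    intro st hlen hval
    obtain ⟨v, c⟩ := e
    have hv := hval (v, c) (by simp)
    have hdg : pvDget st.1 v = pvDget st.1 (pvNorm n v) :=
      pvDget_norm n hn st.1 hlen v hv.1 hv.2
    simp only [pvSigL, List.map_cons, List.foldl_cons]
    by_cases hrel : pvDget st.1 cur + c < pvDget st.1 v
    · have hstepR : pvRelax cur st (v, c) =
          (PySem.List.pySetD st.1 v (pvDget st.1 cur + c), st.2 ++ [(pvDget st.1 cur + c, v)]) := by
        simp only [pvRelax, if_pos hrel]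
      have hstepN : pvRelax cur (st.1, pvSig n st.2) (pvNorm n v, c) =
          (PySem.List.pySetD st.1 (pvNorm n v) (pvDget st.1 cur + c),
           pvSig n st.2 ++ [(pvDget st.1 cur + c, pvNorm n v)]) := by
        simp only [pvRelax, ← hdg, if_pos hrel]
      rw [hstepR, hstepN, ← pvSetD_norm n hn st.1 _ hlen v hv.1 hv.2]
      have hsig : pvSig n (st.2 ++ [(pvDget st.1 cur + c, v)]) =
          pvSig n st.2 ++ [(pvDget st.1 cur + c, pvNorm n v)] := by
        simp [pvSig]
      have := ih (PySem.List.pySetD st.1 v (pvDget st.1 cur + c),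
          st.2 ++ [(pvDget st.1 cur + c, v)])
        (by simp only [pvSetD_length]; exact hlen)
        (fun x hx => hval x (by simp [hx]))
      rw [← hsig]
      exact this
    · have hstepR : pvRelax cur st (v, c) = st := by
        simp only [pvRelax, if_neg hrel]
      have hstepN : pvRelax cur (st.1, pvSig n st.2) (pvNorm n v, c) = (st.1, pvSig n st.2) := by
        simp only [pvRelax, ← hdg, if_neg hrel]
      rw [hstepR, hstepN]
      exact ih st hlen (fun x hx => hval x (by simp [hx]))

theorem pvFold_labels (cur : Int) :
    ∀ (L : List (Int × Int)) (st : List Int × List (Int × Int)),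
      ∀ e ∈ (L.foldl (pvRelax cur) st).2, e ∈ st.2 ∨ ∃ vc ∈ L, e.2 = vc.1 := by
  intro L
  induction L with
  | nil => intro st e he; exact Or.inl he
  | cons x t ih =>
    intro st e he
    rcases ih (pvRelax cur st x) e he with h | ⟨vc, hvc, hevc⟩
    · rw [pvRelax] at h
      split_ifs at h
      · rcases List.mem_append.mp h with h2 | h2
        · exact Or.inl h2
        · right
          refine ⟨x, by simp, ?_⟩
          have : e = (pvDget st.1 cur + x.2, x.1) := by simpa using h2
          rw [this]
      · exact Or.inl h
    · exact Or.inr ⟨vc, by simp [hvc], hevc⟩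

-- ===== adjacency list characterization =====

theorem pvDget_idx (f : List Int) (k : Nat) : pvDget f (k : Int) = f.getD k 0 :=
  PySem.List.pyGetD_natCast f k 0

theorem pvDget0 (f : List Int) : pvDget f 0 = f.getD 0 0 := pvDget_idx f 0
theorem pvDget1 (f : List Int) : pvDget f 1 = f.getD 1 0 := pvDget_idx f 1
theorem pvDget2 (f : List Int) : pvDget f 2 = f.getD 2 0 := pvDget_idx f 2

def pvE1raw (n : Int) (f : List Int) (u v c : Int) : Prop :=
  ((pvNorm n (f.getD 0 0) = u ∧ f.getD 1 0 = v) ∨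
   (pvNorm n (f.getD 1 0) = u ∧ f.getD 0 0 = v)) ∧ f.getD 2 0 = c

def pvEraw (n : Int) (l : List (List Int)) (u v c : Int) : Prop :=
  ∃ f ∈ l, pvE1raw n f u v c

theorem pvEraw_cons {n : Int} {f : List Int} {l : List (List Int)} {u v c : Int} :
    pvEraw n (f :: l) u v c ↔ pvE1raw n f u v c ∨ pvEraw n l u v c := by
  simp only [pvEraw, List.mem_cons]
  constructor
  · rintro ⟨g, (rfl | hg), h⟩
    · exact Or.inl h
    · exact Or.inr ⟨g, hg, h⟩
  · rintro (h | ⟨g, hg, h⟩)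
    · exact ⟨f, Or.inl rfl, h⟩
    · exact ⟨g, Or.inr hg, h⟩

def pvAdjStep (adj : List (List (Int × Int))) (fare : List Int) : List (List (Int × Int)) :=
  let adj := PySem.List.pySetD adj (pvDget fare 0)
               (pvAget adj (pvDget fare 0) ++ [(pvDget fare 1, pvDget fare 2)])
  PySem.List.pySetD adj (pvDget fare 1)
               (pvAget adj (pvDget fare 1) ++ [(pvDget fare 0, pvDget fare 2)])

theorem pvBuildAdj_eq (n : Int) (fares : List (List Int)) :
    pvBuildAdj n fares = fares.foldl pvAdjStep (List.replicate (n+1).toNat []) := rfl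

theorem pvAget_setD (adj : List (List (Int × Int))) (i j : Int) (x : List (Int × Int))
    (hi : 0 ≤ i) (hil : i < adj.length) (hj : 0 ≤ j) :
    pvAget (PySem.List.pySetD adj i x) j = if j = i then x else pvAget adj j :=
  pvGetD_setD adj [] i j x hi hil hj

theorem pvAdjStep_spec (n : Int) (adj : List (List (Int × Int))) (f : List Int)
    (hn : 0 ≤ n) (hlen : adj.length = (n+1).toNat)
    (hf0 : -(n+1) ≤ f.getD 0 0) (hf0n : f.getD 0 0 ≤ n)
    (hf1 : -(n+1) ≤ f.getD 1 0) (hf1n : f.getD 1 0 ≤ n) :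
    (pvAdjStep adj f).length = (n+1).toNat ∧
    ∀ u v c : Int, 0 ≤ u →
      ((v, c) ∈ pvAget (pvAdjStep adj f) u ↔ (v, c) ∈ pvAget adj u ∨ pvE1raw n f u v c) := by
  have hNI : (((n+1).toNat : Nat) : Int) = n + 1 := Int.toNat_of_nonneg (by omega)
  obtain ⟨hn00, hn0n⟩ := pvNorm_nonneg n (f.getD 0 0) hf0 hf0n
  obtain ⟨hn10, hn1n⟩ := pvNorm_nonneg n (f.getD 1 0) hf1 hf1n
  have hrw : pvAdjStep adj f =
      (let adj1 := PySem.List.pySetD adj (pvNorm n (f.getD 0 0))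
        (pvAget adj (pvNorm n (f.getD 0 0)) ++ [(f.getD 1 0, f.getD 2 0)]);
       PySem.List.pySetD adj1 (pvNorm n (f.getD 1 0))
        (pvAget adj1 (pvNorm n (f.getD 1 0)) ++ [(f.getD 0 0, f.getD 2 0)])) := by
    show (PySem.List.pySetD (PySem.List.pySetD adj (pvDget f 0)
        (pvAget adj (pvDget f 0) ++ [(pvDget f 1, pvDget f 2)])) (pvDget f 1)
        (pvAget (PySem.List.pySetD adj (pvDget f 0)
          (pvAget adj (pvDget f 0) ++ [(pvDget f 1, pvDget f 2)])) (pvDget f 1) ++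
          [(pvDget f 0, pvDget f 2)])) = _
    rw [pvDget0, pvDget1, pvDget2]
    rw [pvSetD_norm n hn adj _ hlen _ hf0 hf0n,
        pvAget_norm n hn adj hlen _ hf0 hf0n]
    rw [pvSetD_norm n hn _ _ (by rw [pvSetD_length]; exact hlen) _ hf1 hf1n,
        pvAget_norm n hn _ (by rw [pvSetD_length]; exact hlen) _ hf1 hf1n]
  rw [hrw]
  have hil0 : pvNorm n (f.getD 0 0) < (adj.length : Int) := by rw [hlen, hNI]; omega
  have hlen1 : (PySem.List.pySetD adj (pvNorm n (f.getD 0 0))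
      (pvAget adj (pvNorm n (f.getD 0 0)) ++ [(f.getD 1 0, f.getD 2 0)])).length = (n+1).toNat := by
    rw [pvSetD_length]; exact hlen
  have hil1 : pvNorm n (f.getD 1 0) < ((PySem.List.pySetD adj (pvNorm n (f.getD 0 0))
      (pvAget adj (pvNorm n (f.getD 0 0)) ++ [(f.getD 1 0, f.getD 2 0)])).length : Int) := by
    rw [hlen1, hNI]; omega
  constructor
  · simp only [pvSetD_length]
    exact hlen
  · intro u v c hu
    simp only []
    rw [pvAget_setD _ _ _ _ hn10 hil1 hu,
        pvAget_setD _ _ _ _ hn00 hil0 hn10,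
        pvAget_setD _ _ _ _ hn00 hil0 hu]
    simp only [pvE1raw]
    by_cases h1 : u = pvNorm n (f.getD 1 0) <;> by_cases h2 : u = pvNorm n (f.getD 0 0) <;>
      by_cases h3 : pvNorm n (f.getD 1 0) = pvNorm n (f.getD 0 0) <;>
      simp_all [List.mem_append, Prod.ext_iff] <;> tauto

theorem pvAget_replicate (N : Nat) (u : Int) (hu : 0 ≤ u) :
    pvAget (List.replicate N ([] : List (Int × Int))) u = [] := by
  by_cases h : u < (List.replicate N ([] : List (Int × Int))).length
  · rw [pvAget, pvGetD_nonneg_lt _ _ _ hu h, List.getElem_replicate]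
  · exact pvGetD_oob _ _ _ (by omega)

theorem pvBuildAdj_fold (n : Int) (hn : 0 ≤ n) :
    ∀ (l : List (List Int)) (adj : List (List (Int × Int))), pvFBraw n l →
      adj.length = (n+1).toNat →
      (l.foldl pvAdjStep adj).length = (n+1).toNat ∧
      ∀ u v c : Int, 0 ≤ u →
        ((v, c) ∈ pvAget (l.foldl pvAdjStep adj) u ↔ (v, c) ∈ pvAget adj u ∨ pvEraw n l u v c) := by
  intro l
  induction l with
  | nil => intro adj _ hlen; exact ⟨hlen, by simp [pvEraw]⟩
  | cons f t ih =>
    intro adj hfb hlen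
    have hf := hfb f (by simp)
    obtain ⟨hstepl, hstep⟩ := pvAdjStep_spec n adj f hn hlen hf.2.1 hf.2.2.1 hf.2.2.2.1 hf.2.2.2.2.1
    have hfbt : pvFBraw n t := fun g hg => hfb g (by simp [hg])
    obtain ⟨hl2, hmem⟩ := ih (pvAdjStep adj f) hfbt hstepl
    refine ⟨by simpa using hl2, ?_⟩
    intro u v c hu
    rw [List.foldl_cons] at *
    rw [hmem u v c hu, hstep u v c hu, pvEraw_cons]
    tauto

theorem pvBuildAdj_spec (n : Int) (fares : List (List Int)) (hn : 0 ≤ n) (hfb : pvFBraw n fares) :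
    ∀ u v c : Int, 0 ≤ u → ((v, c) ∈ pvAget (pvBuildAdj n fares) u ↔ pvEraw n fares u v c) := by
  intro u v c hu
  rw [pvBuildAdj_eq]
  have := (pvBuildAdj_fold n hn fares (List.replicate (n+1).toNat []) hfb (by simp)).2 u v c hu
  rw [this, pvAget_replicate _ _ hu]
  simp

theorem pvAdj_sig (n : Int) (fares : List (List Int)) (hn : 0 ≤ n) (hfb : pvFBraw n fares) :
    ∀ u v c : Int, 0 ≤ u →
      ((v, c) ∈ pvSigL n (pvAget (pvBuildAdj n fares) u) ↔ pvE (pvNF n fares) u v c) := by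
  intro u v c hu
  rw [pvE_NF]
  constructor
  · intro h
    obtain ⟨⟨w, c2⟩, hw, heq⟩ := List.mem_map.mp h
    cases heq
    obtain ⟨f, hf, hd, hc⟩ := (pvBuildAdj_spec n fares hn hfb u w c2 hu).mp hw
    rcases hd with ⟨ha, hb⟩ | ⟨ha, hb⟩
    · exact ⟨f, hf, Or.inl ⟨ha, by rw [hb]⟩, hc⟩
    · exact ⟨f, hf, Or.inr ⟨by rw [hb], ha⟩, hc⟩
  · rintro ⟨f, hf, hd, hc⟩
    rcases hd with ⟨ha, hb⟩ | ⟨ha, hb⟩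
    · refine List.mem_map.mpr ⟨(f.getD 1 0, c), ?_,
        by show (pvNorm n (f.getD 1 0), c) = (v, c); rw [hb]⟩
      exact (pvBuildAdj_spec n fares hn hfb u (f.getD 1 0) c hu).mpr ⟨f, hf, Or.inl ⟨ha, rfl⟩, hc⟩
    · refine List.mem_map.mpr ⟨(f.getD 0 0, c), ?_,
        by show (pvNorm n (f.getD 0 0), c) = (v, c); rw [ha]⟩
      exact (pvBuildAdj_spec n fares hn hfb u (f.getD 0 0) c hu).mpr ⟨f, hf, Or.inr ⟨hb, rfl⟩, hc⟩

theorem pvAdj_valid (n : Int) (fares : List (List Int)) (hn : 0 ≤ n) (hfb : pvFBraw n fares) :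
    ∀ u : Int, 0 ≤ u → ∀ vc ∈ pvAget (pvBuildAdj n fares) u, -(n+1) ≤ vc.1 ∧ vc.1 ≤ n := by
  intro u hu vc hvc
  obtain ⟨v, c⟩ := vc
  obtain ⟨f, hf, hd, _⟩ := (pvBuildAdj_spec n fares hn hfb u v c hu).mp hvc
  obtain ⟨_, h2, h3, h4, h5, _⟩ := hfb f hf
  rcases hd with ⟨_, hb⟩ | ⟨_, hb⟩
  · rw [← hb]; exact ⟨h4, h5⟩
  · rw [← hb]; exact ⟨h2, h3⟩

-- ===== the Dijkstra loop invariant =====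

def pvN (n : Int) : Nat := (n+1).toNat

structure pvFState (n start : Int) (fares : List (List Int)) (dist : List Int) : Prop where
  len : dist.length = pvN n
  bnd : ∀ j : Int, 0 ≤ j → 0 ≤ pvDget dist j ∧ pvDget dist j ≤ 987654321
  hst : pvDget dist start = 0
  rep : ∀ j : Int, 0 ≤ j → j ≤ n →
    pvDget dist j = 987654321 ∨ j = start ∨ ∃ m, pvWalk fares start m j (pvDget dist j)

structure pvInv (n start : Int) (fares : List (List Int)) (dist : List Int)
    (heap : List (Int × Int)) : Prop where
  fs : pvFState n start fares dist
  hp : ∀ e ∈ heap, 0 ≤ e.2 ∧ e.2 ≤ n ∧ pvDget dist e.2 ≤ e.1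
  wit : ∀ u v c : Int, pvE fares u v c →
    pvDget dist v ≤ pvDget dist u + c ∨ (pvDget dist u, u) ∈ heap

theorem pvSum_nonneg_of_bnd (dist : List Int)
    (bnd : ∀ j : Int, 0 ≤ j → 0 ≤ pvDget dist j ∧ pvDget dist j ≤ 987654321) :
    0 ≤ dist.sum := by
  apply List.sum_nonneg
  intro x hx
  obtain ⟨i, hi, rfl⟩ := List.mem_iff_getElem.mp hx
  have h := (bnd (i : Int) (by positivity)).1
  rwa [pvDget, pvGetD_nonneg_lt _ _ _ (by positivity) (by simpa using hi)] at h

theorem pvRelaxFold_spec (n start cur : Int) (fares : List (List Int))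
    (hn : 0 ≤ n) (hfb : pvFB n fares) (hstart : 0 ≤ start ∧ start ≤ n)
    (hcur : 0 ≤ cur ∧ cur ≤ n) :
    ∀ (L : List (Int × Int)) (dist : List Int) (heap : List (Int × Int)),
      pvFState n start fares dist →
      (∀ e ∈ heap, 0 ≤ e.2 ∧ e.2 ≤ n ∧ pvDget dist e.2 ≤ e.1) →
      (∀ vc ∈ L, pvE fares cur vc.1 vc.2) →
      pvFState n start fares (L.foldl (pvRelax cur) (dist, heap)).1 ∧
      (∀ e ∈ (L.foldl (pvRelax cur) (dist, heap)).2,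
        0 ≤ e.2 ∧ e.2 ≤ n ∧ pvDget (L.foldl (pvRelax cur) (dist, heap)).1 e.2 ≤ e.1) ∧
      pvDget (L.foldl (pvRelax cur) (dist, heap)).1 cur = pvDget dist cur ∧
      (∀ j : Int, 0 ≤ j → pvDget (L.foldl (pvRelax cur) (dist, heap)).1 j ≤ pvDget dist j) ∧
      (∀ e ∈ heap, e ∈ (L.foldl (pvRelax cur) (dist, heap)).2) ∧
      (∀ u : Int, 0 ≤ u → pvDget (L.foldl (pvRelax cur) (dist, heap)).1 u = pvDget dist u ∨
        (pvDget (L.foldl (pvRelax cur) (dist, heap)).1 u, u) ∈ (L.foldl (pvRelax cur) (dist, heap)).2) ∧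
      (∀ vc ∈ L, pvDget (L.foldl (pvRelax cur) (dist, heap)).1 vc.1 ≤
        pvDget (L.foldl (pvRelax cur) (dist, heap)).1 cur + vc.2) ∧
      (L.foldl (pvRelax cur) (dist, heap)).1.sum + ((L.foldl (pvRelax cur) (dist, heap)).2.length : Int) ≤
        dist.sum + (heap.length : Int) := by
  intro L
  induction L with
  | nil =>
    intro dist heap hfs hhp _
    exact ⟨hfs, hhp, rfl, fun j _ => le_refl _, fun e he => he, fun u _ => Or.inl rfl,
      fun vc hvc => absurd hvc (by simp), le_refl _⟩
  | cons vc t ih =>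
    intro dist heap hfs hhp hL
    obtain ⟨v, c⟩ := vc
    have hE : pvE fares cur v c := hL (v, c) (by simp)
    obtain ⟨_, hv, hc⟩ := pvE_bounds hfb hE
    simp only [List.foldl_cons]
    by_cases hrel : pvDget dist cur + c < pvDget dist v
    · -- relaxation fires
      have hstep : pvRelax cur (dist, heap) (v, c) =
          (PySem.List.pySetD dist v (pvDget dist cur + c),
           heap ++ [(pvDget dist cur + c, v)]) := by
        simp only [pvRelax, hrel, if_pos]
      set newv := pvDget dist cur + c with hnewv
      set dist2 := PySem.List.pySetD dist v newv with hdist2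
      set heap2 := heap ++ [(newv, v)] with hheap2
      have hnew0 : 0 ≤ newv := by
        have := (hfs.bnd cur hcur.1).1; omega
      have hvlen : v < (dist.length : Int) := by
        rw [hfs.len]
        have h1 : ((pvN n : Nat) : Int) = n + 1 := Int.toNat_of_nonneg (by omega)
        omega
      have hvcur : v ≠ cur := by
        intro h; rw [h] at hrel; omega
      have hvstart : v ≠ start := by
        intro h; rw [h, hfs.hst] at hrel; omega
      have hD2 : ∀ j : Int, 0 ≤ j →
          pvDget dist2 j = if j = v then newv else pvDget dist j :=
        fun j hj => pvDget_set dist v j newv hv.1 hvlen hj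
      have hlen2 : dist2.length = pvN n := by
        rw [hdist2, pvSetD_length]; exact hfs.len
      have hub_v := (hfs.bnd v hv.1).2
      have hfs2 : pvFState n start fares dist2 := by
        refine ⟨hlen2, ?_, ?_, ?_⟩
        · intro j hj
          rw [hD2 j hj]
          split_ifs with h
          · exact ⟨hnew0, by omega⟩
          · exact hfs.bnd j hj
        · rw [hD2 start hstart.1, if_neg (fun h => hvstart h.symm)]
          exact hfs.hst
        · intro j hj hjn
          rw [hD2 j hj]
          split_ifs with h
          · subst h
            rcases hfs.rep cur hcur.1 hcur.2 with hINF | hcs | ⟨m, hw⟩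
            · exfalso; omega
            · right; right
              refine ⟨[], ?_⟩
              have hE' : pvE fares start j c := by rwa [hcs] at hE
              have h0 : newv = c := by rw [hnewv, hcs, hfs.hst, zero_add]
              rw [h0]
              exact pvWalk.single hE'
            · right; right
              exact ⟨m ++ [cur], pvWalk_snoc hw hE⟩
          · exact hfs.rep j hj hjn
      have hhp2 : ∀ e ∈ heap2, 0 ≤ e.2 ∧ e.2 ≤ n ∧ pvDget dist2 e.2 ≤ e.1 := by
        intro e he
        rcases List.mem_append.mp he with h | h
        · obtain ⟨he1, he2, he3⟩ := hhp e h
          refine ⟨he1, he2, ?_⟩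
          rw [hD2 e.2 he1]
          split_ifs with hev
          · rw [hev] at he3; omega
          · exact he3
        · have : e = (newv, v) := by simpa using h
          subst this
          refine ⟨hv.1, hv.2, ?_⟩
          rw [hD2 v hv.1, if_pos rfl]
      have hsum2 : dist2.sum = dist.sum + newv - pvDget dist v := by
        rw [hdist2, PySem.List.pySetD_of_nonneg _ _ hv.1,
            pvSum_set dist v.toNat newv (by omega)]
        rw [pvDget, pvGetD_nonneg_lt dist 0 v hv.1 hvlen]
      obtain ⟨c1, c2, c3, c4, c5, c6, c7, c8⟩ := ih dist2 heap2 hfs2 hhp2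
        (fun x hx => hL x (by simp [hx]))
      rw [hstep]
      refine ⟨c1, c2, ?_, ?_, ?_, ?_, ?_, ?_⟩
      · rw [c3, hD2 cur hcur.1, if_neg (fun h => hvcur h.symm)]
      · intro j hj
        refine le_trans (c4 j hj) ?_
        rw [hD2 j hj]
        split_ifs with h
        · subst h; omega
        · exact le_refl _
      · intro e he
        exact c5 e (List.mem_append.mpr (Or.inl he))
      · intro u hu
        rcases c6 u hu with h | h
        · by_cases huv : u = v
          · subst huv
            right
            rw [h, hD2 u hu, if_pos rfl]
            exact c5 (newv, u) (List.mem_append.mpr (Or.inr (by simp)))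
          · left
            rw [h, hD2 u hu, if_neg huv]
        · right; exact h
      · intro wc hwc
        rcases List.mem_cons.mp hwc with h | h
        · subst h
          have h1 : pvDget (t.foldl (pvRelax cur) (dist2, heap2)).1 v ≤ newv := by
            have := c4 v hv.1
            rwa [hD2 v hv.1, if_pos rfl] at this
          have h2 : pvDget (t.foldl (pvRelax cur) (dist2, heap2)).1 cur = pvDget dist cur := by
            rw [c3, hD2 cur hcur.1, if_neg (fun h => hvcur h.symm)]
          rw [h2]
          omega
        · exact c7 wc h
      · have hlh2 : (heap2.length : Int) = (heap.length : Int) + 1 := by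
          simp [hheap2]
        have := c8
        rw [hsum2, hlh2] at this
        omega
    · -- no relaxation
      have hstep : pvRelax cur (dist, heap) (v, c) = (dist, heap) := by
        simp only [pvRelax, if_neg hrel]
      rw [hstep]
      obtain ⟨c1, c2, c3, c4, c5, c6, c7, c8⟩ := ih dist heap hfs hhp
        (fun x hx => hL x (by simp [hx]))
      refine ⟨c1, c2, c3, c4, c5, c6, ?_, c8⟩
      intro wc hwc
      rcases List.mem_cons.mp hwc with h | h
      · subst h
        calc pvDget (t.foldl (pvRelax cur) (dist, heap)).1 v ≤ pvDget dist v := c4 v hv.1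
          _ ≤ pvDget dist cur + c := by omega
          _ = pvDget (t.foldl (pvRelax cur) (dist, heap)).1 cur + c := by rw [c3]
      · exact c7 wc h


theorem pvDijkLoop_spec (n start : Int) (F : List (List Int)) (adj : List (List (Int × Int)))
    (hn : 0 ≤ n) (hstart : 0 ≤ start ∧ start ≤ n) (hfb : pvFB n F)
    (hadjN : ∀ u v c : Int, 0 ≤ u → ((v, c) ∈ pvSigL n (pvAget adj u) ↔ pvE F u v c))
    (hadjV : ∀ u : Int, 0 ≤ u → ∀ vc ∈ pvAget adj u, -(n+1) ≤ vc.1 ∧ vc.1 ≤ n)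
    (hadjlen : adj.length = (n+1).toNat) :
    ∀ (fuel : Nat) (dist : List Int) (heap : List (Int × Int)),
      pvInv n start F dist (pvSig n heap) →
      (∀ e ∈ heap, -(n+1) ≤ e.2 ∧ e.2 ≤ n) →
      dist.sum + (heap.length : Int) < (fuel : Int) →
      pvInv n start F (pvDijkLoop adj fuel dist heap PySem.Set.empty) [] := by
  have hNI : (((n+1).toNat : Nat) : Int) = n + 1 := Int.toNat_of_nonneg (by omega)
  intro fuel
  induction fuel with
  | zero =>
    intro dist heap hinv hval hm
    exfalso
    have := pvSum_nonneg_of_bnd dist hinv.fs.bnd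
    have : (0:Int) ≤ (heap.length : Int) := by positivity
    omega
  | succ fuel ih =>
    intro dist heap hinv hval hm
    simp only [pvDijkLoop]
    cases hpop : pvPopMin heap with
    | none =>
      have : heap = [] := (pvPopMin_none heap).mp hpop
      subst this
      exact (by simpa [pvSig] using hinv)
    | some p =>
      obtain ⟨⟨d, x⟩, rest⟩ := p
      have hperm := pvPopMin_perm heap (d, x) rest hpop
      have hsigperm : (pvSig n heap).Perm ((d, pvNorm n x) :: pvSig n rest) := by
        have := hperm.map (fun e : Int × Int => (e.1, pvNorm n e.2))
        simpa [pvSig] using this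
      have hxval : -(n+1) ≤ x ∧ x ≤ n := hval (d, x) (hperm.mem_iff.mpr (by simp))
      have hcur : 0 ≤ pvNorm n x ∧ pvNorm n x ≤ n := pvNorm_nonneg n x hxval.1 hxval.2
      have hlenD : dist.length = (n+1).toNat := hinv.fs.len
      have hhp' : ∀ e ∈ pvSig n rest, 0 ≤ e.2 ∧ e.2 ≤ n ∧ pvDget dist e.2 ≤ e.1 :=
        fun e he => hinv.hp e (hsigperm.mem_iff.mpr (by simp [he]))
      simp only [pvSetEmpty_contains, Bool.false_eq_true, if_false]
      have hAg : pvAget adj x = pvAget adj (pvNorm n x) :=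
        pvAget_norm n hn adj hadjlen x hxval.1 hxval.2
      have hRel : (pvAget adj x).foldl (pvRelax x) (dist, rest) =
          (pvAget adj (pvNorm n x)).foldl (pvRelax (pvNorm n x)) (dist, rest) := by
        rw [hAg]
        by_cases hx0 : x < 0
        · have hw := pvFoldRelax_wrap (n+1).toNat x (by omega) hx0
            (pvAget adj (pvNorm n x)) (dist, rest) hlenD
          rw [hNI] at hw
          have heq : pvNorm n x = x + (n + 1) := by unfold pvNorm; rw [if_pos hx0]
          rw [← heq] at hw
          exact hw
        · rw [pvNorm_eq_self n x (by omega)]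
      have hLval : ∀ vc ∈ pvAget adj (pvNorm n x), -(n+1) ≤ vc.1 ∧ vc.1 ≤ n :=
        hadjV (pvNorm n x) hcur.1
      obtain ⟨hc1, hc2⟩ := pvFold_sig n hn (pvNorm n x) (pvAget adj (pvNorm n x))
        (dist, rest) hlenD hLval
      dsimp only at hc1 hc2
      obtain ⟨c1, c2, c3, c4, c5, c6, c7, c8⟩ :=
        pvRelaxFold_spec n start (pvNorm n x) F hn hfb hstart hcur
          (pvSigL n (pvAget adj (pvNorm n x))) dist (pvSig n rest)
          hinv.fs hhp' (fun vc hvc => (hadjN (pvNorm n x) vc.1 vc.2 hcur.1).mp hvc)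
      have hlh : (heap.length : Int) = (rest.length : Int) + 1 := by
        rw [hperm.length_eq]; simp
      have hslen : ((pvSig n rest).length : Int) = (rest.length : Int) := by simp [pvSig]
      -- transport to the raw fold state
      rw [hRel]
      apply ih
      · refine ⟨by rw [hc1]; exact c1, by rw [hc1, hc2]; exact c2, ?_⟩
        rw [hc1, hc2]
        -- wit restored
        intro u v c hE
        obtain ⟨hu, hv, hcge⟩ := pvE_bounds hfb hE
        by_cases hux : u = pvNorm n x
        · rw [hux] at hE hu ⊢
          left
          exact c7 (v, c) ((hadjN (pvNorm n x) v c hu.1).mpr hE)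
        · have hW0 : pvDget dist v ≤ pvDget dist u + c ∨ (pvDget dist u, u) ∈ pvSig n rest := by
            rcases hinv.wit u v c hE with h | h
            · exact Or.inl h
            · rcases List.mem_cons.mp (hsigperm.mem_iff.mp h) with h2 | h2
              · exact absurd (congrArg Prod.snd h2) (by simpa using hux)
              · exact Or.inr h2
          rcases c6 u hu.1 with heq | hmem
          · rcases hW0 with h | h
            · left
              have := c4 v hv.1
              rw [heq]
              omega
            · right
              rw [heq]
              exact c5 _ h
          · exact Or.inr hmem
      · -- raw label validity of the new heap
        intro e he
        rcases pvFold_labels (pvNorm n x) (pvAget adj (pvNorm n x)) (dist, rest) e he with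
          h | ⟨vc, hvc, hevc⟩
        · exact hval e (hperm.mem_iff.mpr (by simp [h]))
        · rw [hevc]; exact hLval vc hvc
      · -- measure
        have hlen2 : (((pvAget adj (pvNorm n x)).foldl (pvRelax (pvNorm n x)) (dist, rest)).2.length : Int) =
            (((pvSigL n (pvAget adj (pvNorm n x))).foldl (pvRelax (pvNorm n x)) (dist, pvSig n rest)).2.length : Int) := by
          rw [← hc2]; simp [pvSig]
        rw [hc1, hlen2]
        omega

structure pvDFinal (n start : Int) (fares : List (List Int)) (f : List Int) : Prop where
  fs : pvFState n start fares f
  closed : ∀ u v c : Int, pvE fares u v c → pvDget f v ≤ pvDget f u + c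

theorem pvDget_replicate (N : Nat) (j : Int) (hj : 0 ≤ j) :
    pvDget (List.replicate N (987654321 : Int)) j = if j < (N : Int) then 987654321 else 0 := by
  by_cases h : j < (N : Int)
  · rw [pvDget, pvGetD_nonneg_lt _ _ _ hj (by simpa using h), List.getElem_replicate, if_pos h]
  · rw [pvDget, pvGetD_oob _ _ _ (by simpa using h), if_neg h]

theorem pvDijk_spec (n start : Int) (fares : List (List Int)) (adj : List (List (Int × Int)))
    (hn : 0 ≤ n) (hstart : 0 ≤ start ∧ start ≤ n) (hfb : pvFB n fares)
    (hadjN : ∀ u v c : Int, 0 ≤ u → ((v, c) ∈ pvSigL n (pvAget adj u) ↔ pvE fares u v c))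
    (hadjV : ∀ u : Int, 0 ≤ u → ∀ vc ∈ pvAget adj u, -(n+1) ≤ vc.1 ∧ vc.1 ≤ n)
    (hadjlen : adj.length = (n+1).toNat) :
    pvDFinal n start fares (pvDijk adj start (List.replicate (n+1).toNat 987654321)) := by
  have hNI : (((n+1).toNat : Nat) : Int) = n + 1 := Int.toNat_of_nonneg (by omega)
  have hlen0 : (List.replicate (n+1).toNat (987654321:Int)).length = (n+1).toNat := by
    simp
  have hsl : start < ((List.replicate (n+1).toNat (987654321:Int)).length : Int) := by
    rw [hlen0]; omega
  have hD0 : ∀ j : Int, 0 ≤ j →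
      pvDget (PySem.List.pySetD (List.replicate (n+1).toNat 987654321) start 0) j =
      if j = start then 0 else pvDget (List.replicate (n+1).toNat 987654321) j :=
    fun j hj => pvDget_set _ start j 0 hstart.1 hsl hj
  have hinv : pvInv n start fares
      (PySem.List.pySetD (List.replicate (n+1).toNat 987654321) start 0) [(0, start)] := by
    refine ⟨⟨?_, ?_, ?_, ?_⟩, ?_, ?_⟩
    · rw [pvSetD_length]; exact hlen0
    · intro j hj
      rw [hD0 j hj, pvDget_replicate _ j hj]
      split_ifs <;> omega
    · rw [hD0 start hstart.1, if_pos rfl]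
    · intro j hj hjn
      rw [hD0 j hj]
      split_ifs with h
      · right; left; exact h
      · left
        rw [pvDget_replicate _ j hj, if_pos (show j < (((n+1).toNat : Nat) : Int) by omega)]
    · intro e he
      have : e = ((0 : Int), start) := by simpa using he
      subst this
      refine ⟨hstart.1, hstart.2, ?_⟩
      rw [hD0 start hstart.1, if_pos rfl]
    · intro u v c hE
      obtain ⟨hu, hv, hc⟩ := pvE_bounds hfb hE
      by_cases h : u = start
      · right
        rw [h, hD0 start hstart.1, if_pos rfl]
        simp
      · left
        rw [hD0 u hu.1, if_neg h, hD0 v hv.1,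
            pvDget_replicate _ u hu.1, if_pos (show u < (((n+1).toNat : Nat) : Int) by omega)]
        split_ifs with h2
        · omega
        · rw [pvDget_replicate _ v hv.1]
          split_ifs with h3
          · omega
          · omega
  have hsig0 : pvSig n [((0:Int), start)] = [((0:Int), start)] := by
    simp [pvSig, pvNorm_eq_self n start hstart.1]
  have hfin := pvDijkLoop_spec n start fares adj hn hstart hfb hadjN hadjV hadjlen
    (((PySem.List.pySetD (List.replicate (n+1).toNat 987654321) start 0).map Int.toNat).sum + 2)
    (PySem.List.pySetD (List.replicate (n+1).toNat 987654321) start 0) [(0, start)]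
    (by rw [hsig0]; exact hinv)
    (by intro e he
        have : e = ((0:Int), start) := by simpa using he
        subst this
        exact ⟨by omega, hstart.2⟩)
    (by
      have h1 := pvSum_le_toNatSum (PySem.List.pySetD (List.replicate (n+1).toNat 987654321) start 0)
      have h2 : ((((PySem.List.pySetD (List.replicate (n+1).toNat 987654321) start 0).map Int.toNat).sum + 2 : Nat) : Int) =
          ((((PySem.List.pySetD (List.replicate (n+1).toNat 987654321) start 0).map Int.toNat).sum : Nat) : Int) + 2 := by
        push_cast; ring
      rw [h2]
      simp only [List.length_cons, List.length_nil]
      omega)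
  refine ⟨hfin.fs, ?_⟩
  intro u v c hE
  rcases hfin.wit u v c hE with h | h
  · exact h
  · exact absurd h (by simp)

theorem pvDFinal_le_walk {n start : Int} {fares : List (List Int)} {f : List Int}
    (hf : pvDFinal n start fares f) {u v c : Int} {m : List Int}
    (hw : pvWalk fares u m v c) : pvDget f v ≤ pvDget f u + c := by
  induction hw with
  | single he => exact hf.closed _ _ _ he
  | cons he _ ih =>
    have := hf.closed _ _ _ he
    omega

theorem pvDFinal_le_walk_start {n start : Int} {fares : List (List Int)} {f : List Int}
    (hf : pvDFinal n start fares f) {v c : Int} {m : List Int}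
    (hw : pvWalk fares start m v c) : pvDget f v ≤ c := by
  have := pvDFinal_le_walk hf hw
  rw [hf.fs.hst] at this
  omega

-- ===== the Floyd-Warshall matrix =====

def pvG0 (n : Int) : List (List Int) :=
  (List.range (n+1).toNat).map (fun i => (List.range (n+1).toNat).map
    (fun j => if i = j then (0 : Int) else 987654321))

def pvInitStep (g : List (List Int)) (fare : List Int) : List (List Int) :=
  if pvDget fare 2 < pvMget g (pvDget fare 0) (pvDget fare 1) then
    pvMset (pvMset g (pvDget fare 0) (pvDget fare 1) (pvDget fare 2))
           (pvDget fare 1) (pvDget fare 0) (pvDget fare 2)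
  else g

def pvShape (N : Nat) (g : List (List Int)) : Prop := g.length = N ∧ ∀ r ∈ g, r.length = N

theorem pvRow_len {N : Nat} {g : List (List Int)} (hs : pvShape N g) (i : Int)
    (h0 : 0 ≤ i) (hN : i < (N : Int)) : (PySem.List.pyGetD g i []).length = N := by
  rw [pvGetD_nonneg_lt g [] i h0 (by rw [hs.1]; omega)]
  exact hs.2 _ (List.getElem_mem _)

theorem pvMget_mapmap (f : Nat → Nat → Int) (N : Nat) (i j : Int)
    (h0i : 0 ≤ i) (hiN : i < (N : Int)) (h0j : 0 ≤ j) (hjN : j < (N : Int)) :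
    pvMget ((List.range N).map (fun i => (List.range N).map (fun j => f i j))) i j =
      f i.toNat j.toNat := by
  have hlen : (((List.range N).map (fun i => (List.range N).map (fun j => f i j))).length : Int) = N := by simp
  rw [pvMget, pvGetD_nonneg_lt _ [] i h0i (by omega)]
  simp only [List.getElem_map, List.getElem_range]
  rw [pvDget, pvGetD_nonneg_lt _ 0 j h0j (by simp; omega)]
  simp

theorem pvShape_mapmap (f : Nat → Nat → Int) (N : Nat) :
    pvShape N ((List.range N).map (fun i => (List.range N).map (fun j => f i j))) := by
  constructor
  · simp
  · intro r hr
    obtain ⟨i, _, rfl⟩ := List.mem_map.mp hr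
    simp

theorem pvMget_g0 (n : Int) (hn : 0 ≤ n) (i j : Int)
    (h0i : 0 ≤ i) (hiN : i ≤ n) (h0j : 0 ≤ j) (hjN : j ≤ n) :
    pvMget (pvG0 n) i j = if i = j then 0 else 987654321 := by
  have hNI : (((n+1).toNat : Nat) : Int) = n + 1 := Int.toNat_of_nonneg (by omega)
  rw [pvG0, pvMget_mapmap _ _ i j h0i (by omega) h0j (by omega)]
  by_cases h : i = j
  · simp [h]
  · have : i.toNat ≠ j.toNat := by omega
    simp [h, this]

theorem pvShape_g0 (n : Int) : pvShape (n+1).toNat (pvG0 n) := pvShape_mapmap _ _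

theorem pvShape_mset {N : Nat} {g : List (List Int)} (hs : pvShape N g) (i j x : Int)
    (h0 : 0 ≤ i) (hiN : i < (N : Int)) : pvShape N (pvMset g i j x) := by
  constructor
  · rw [pvMset, pvSetD_length]; exact hs.1
  · intro r hr
    rw [pvMset, PySem.List.pySetD_of_nonneg _ _ h0] at hr
    rcases List.mem_or_eq_of_mem_set hr with h | h
    · exact hs.2 _ h
    · subst h
      rw [pvSetD_length]
      exact pvRow_len hs i h0 hiN

theorem pvMget_mset {N : Nat} {g : List (List Int)} (hs : pvShape N g) (u v : Int)
    (h0u : 0 ≤ u) (huN : u < (N : Int)) (h0v : 0 ≤ v) (hvN : v < (N : Int))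
    (x : Int) (p q : Int) (h0p : 0 ≤ p) (h0q : 0 ≤ q) :
    pvMget (pvMset g u v x) p q = if p = u ∧ q = v then x else pvMget g p q := by
  rw [pvMget, pvMset,
      pvGetD_setD g [] u p _ h0u (by rw [hs.1]; omega) h0p]
  by_cases hp : p = u
  · rw [if_pos hp]
    rw [pvDget, pvGetD_setD _ 0 v q x h0v (by rw [pvRow_len hs u h0u huN]; omega) h0q]
    by_cases hq : q = v
    · simp [hp, hq]
    · simp [hq, hp, pvMget, pvDget]
  · simp only [if_neg hp]
    have : ¬(p = u ∧ q = v) := fun h => hp h.1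
    rw [if_neg this, pvMget]

structure pvQ (n : Int) (fares : List (List Int)) (g : List (List Int)) : Prop where
  shape : pvShape (n+1).toNat g
  bnd : ∀ i j : Int, 0 ≤ i → i ≤ n → 0 ≤ j → j ≤ n →
    0 ≤ pvMget g i j ∧ pvMget g i j ≤ 987654321
  diag : ∀ i : Int, 0 ≤ i → i ≤ n → pvMget g i i = 0
  rep : ∀ i j : Int, 0 ≤ i → i ≤ n → 0 ≤ j → j ≤ n →
    pvMget g i j = 987654321 ∨ i = j ∨ ∃ m, pvWalk fares i m j (pvMget g i j)

def pvSym (n : Int) (g : List (List Int)) : Prop :=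
  ∀ i j : Int, 0 ≤ i → i ≤ n → 0 ≤ j → j ≤ n → pvMget g i j = pvMget g j i

theorem pvQ_g0 (n : Int) (fares : List (List Int)) (hn : 0 ≤ n) :
    pvQ n fares (pvG0 n) ∧ pvSym n (pvG0 n) := by
  refine ⟨⟨pvShape_g0 n, ?_, ?_, ?_⟩, ?_⟩
  · intro i j h1 h2 h3 h4
    rw [pvMget_g0 n hn i j h1 h2 h3 h4]
    split_ifs <;> omega
  · intro i h1 h2
    rw [pvMget_g0 n hn i i h1 h2 h1 h2, if_pos rfl]
  · intro i j h1 h2 h3 h4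
    rw [pvMget_g0 n hn i j h1 h2 h3 h4]
    split_ifs with h
    · right; left; exact h
    · left; rfl
  · intro i j h1 h2 h3 h4
    rw [pvMget_g0 n hn i j h1 h2 h3 h4, pvMget_g0 n hn j i h3 h4 h1 h2]
    by_cases h : i = j <;> simp [h]
    exact fun hh => h hh.symm

theorem pvInitStep_spec (n : Int) (fares : List (List Int)) (hn : 0 ≤ n)
    (hfb : pvFB n fares) (g : List (List Int)) (f : List Int) (hfm : f ∈ fares)
    (hQ : pvQ n fares g) (hsym : pvSym n g) :
    pvQ n fares (pvInitStep g f) ∧ pvSym n (pvInitStep g f) ∧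
    (∀ i j : Int, 0 ≤ i → i ≤ n → 0 ≤ j → j ≤ n →
      pvMget (pvInitStep g f) i j ≤ pvMget g i j) ∧
    pvMget (pvInitStep g f) (f.getD 0 0) (f.getD 1 0) ≤ f.getD 2 0 ∧
    pvMget (pvInitStep g f) (f.getD 1 0) (f.getD 0 0) ≤ f.getD 2 0 := by
  obtain ⟨hflen, hu0, hun, hv0, hvn, hc0⟩ := hfb f hfm
  have hNI : (((n+1).toNat : Nat) : Int) = n + 1 := Int.toNat_of_nonneg (by omega)
  rw [pvInitStep, pvDget0, pvDget1, pvDget2]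
  set u := f.getD 0 0
  set v := f.getD 1 0
  set c := f.getD 2 0
  by_cases hcond : c < pvMget g u v
  · rw [if_pos hcond]
    have huv : u ≠ v := by
      intro h
      rw [h, hQ.diag v hv0 hvn] at hcond
      omega
    have hs1 : pvShape (n+1).toNat (pvMset g u v c) :=
      pvShape_mset hQ.shape u v c hu0 (by omega)
    have hM1 : ∀ p q : Int, 0 ≤ p → 0 ≤ q →
        pvMget (pvMset g u v c) p q = if p = u ∧ q = v then c else pvMget g p q :=
      fun p q hp hq => pvMget_mset hQ.shape u v hu0 (by omega) hv0 (by omega) c p q hp hq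
    have hM2 : ∀ p q : Int, 0 ≤ p → 0 ≤ q →
        pvMget (pvMset (pvMset g u v c) v u c) p q =
          if p = v ∧ q = u then c else if p = u ∧ q = v then c else pvMget g p q := by
      intro p q hp hq
      rw [pvMget_mset hs1 v u hv0 (by omega) hu0 (by omega) c p q hp hq, hM1 p q hp hq]
    have hE : pvE fares u v c := ⟨f, hfm, Or.inl ⟨rfl, rfl⟩, rfl⟩
    refine ⟨⟨?_, ?_, ?_, ?_⟩, ?_, ?_, ?_, ?_⟩
    · exact pvShape_mset hs1 v u c hv0 (by omega)
    · intro i j h1 h2 h3 h4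
      rw [hM2 i j h1 h3]
      have := hQ.bnd i j h1 h2 h3 h4
      have := (hQ.bnd u v hu0 hun hv0 hvn).2
      split_ifs <;> omega
    · intro i h1 h2
      rw [hM2 i i h1 h1]
      rw [if_neg (by omega), if_neg (by omega)]
      exact hQ.diag i h1 h2
    · intro i j h1 h2 h3 h4
      rw [hM2 i j h1 h3]
      split_ifs with ha hb
      · right; right
        exact ⟨[], pvWalk.single (by rw [ha.1, ha.2]; exact pvE_symm hE)⟩
      · right; right
        exact ⟨[], pvWalk.single (by rw [hb.1, hb.2]; exact hE)⟩
      · exact hQ.rep i j h1 h2 h3 h4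
    · intro i j h1 h2 h3 h4
      rw [hM2 i j h1 h3, hM2 j i h3 h1]
      have hgs := hsym i j h1 h2 h3 h4
      split_ifs <;> omega
    · intro i j h1 h2 h3 h4
      rw [hM2 i j h1 h3]
      have h5 := (hQ.bnd u v hu0 hun hv0 hvn).2
      have h6 : pvMget g u v = pvMget g v u := hsym u v hu0 hun hv0 hvn
      split_ifs with ha hb
      · rw [ha.1, ha.2, ← h6]; omega
      · rw [hb.1, hb.2]; omega
      · exact le_refl _
    · rw [hM2 u v hu0 hv0, if_neg (by omega), if_pos ⟨rfl, rfl⟩]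
    · rw [hM2 v u hv0 hu0, if_pos ⟨rfl, rfl⟩]
  · rw [if_neg hcond]
    have h1 : pvMget g u v ≤ c := by omega
    refine ⟨hQ, hsym, fun i j _ _ _ _ => le_refl _, h1, ?_⟩
    rw [← hsym u v hu0 hun hv0 hvn]
    exact h1

theorem pvG1_spec (n : Int) (fares : List (List Int)) (hn : 0 ≤ n) (hfb : pvFB n fares) :
    ∀ (l : List (List Int)) (g : List (List Int)), (∀ f ∈ l, f ∈ fares) →
      pvQ n fares g → pvSym n g →
      pvQ n fares (l.foldl pvInitStep g) ∧ pvSym n (l.foldl pvInitStep g) ∧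
      (∀ i j : Int, 0 ≤ i → i ≤ n → 0 ≤ j → j ≤ n →
        pvMget (l.foldl pvInitStep g) i j ≤ pvMget g i j) ∧
      (∀ f ∈ l, pvMget (l.foldl pvInitStep g) (f.getD 0 0) (f.getD 1 0) ≤ f.getD 2 0 ∧
        pvMget (l.foldl pvInitStep g) (f.getD 1 0) (f.getD 0 0) ≤ f.getD 2 0) := by
  intro l
  induction l with
  | nil =>
    intro g _ hQ hsym
    exact ⟨hQ, hsym, fun i j _ _ _ _ => le_refl _, fun f hf => absurd hf (by simp)⟩
  | cons f t ih =>
    intro g hsub hQ hsym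
    have hfm : f ∈ fares := hsub f (by simp)
    obtain ⟨hflen, hu0, hun, hv0, hvn, hc0⟩ := hfb f hfm
    obtain ⟨hQ2, hsym2, hmono2, hle1, hle2⟩ :=
      pvInitStep_spec n fares hn hfb g f hfm hQ hsym
    obtain ⟨jQ, jsym, jmono, jle⟩ := ih (pvInitStep g f) (fun x hx => hsub x (by simp [hx])) hQ2 hsym2
    simp only [List.foldl_cons]
    refine ⟨jQ, jsym, ?_, ?_⟩
    · intro i j h1 h2 h3 h4
      exact le_trans (jmono i j h1 h2 h3 h4) (hmono2 i j h1 h2 h3 h4)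
    · intro f2 hf2
      rcases List.mem_cons.mp hf2 with h | h
      · subst h
        exact ⟨le_trans (jmono _ _ hu0 hun hv0 hvn) hle1,
               le_trans (jmono _ _ hv0 hvn hu0 hun) hle2⟩
      · exact jle f2 h

def pvCK (n : Int) (k : Nat) (fares : List (List Int)) (g : List (List Int)) : Prop :=
  ∀ i j c : Int, ∀ m : List Int, 0 ≤ i → i ≤ n → 0 ≤ j → j ≤ n →
    pvWalk fares i m j c → (∀ x ∈ m, 0 ≤ x ∧ x < (k : Int)) → pvMget g i j ≤ c

theorem pvMget_round (n : Int) (hn : 0 ≤ n) (g : List (List Int)) (k : Nat)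
    (i j : Int) (h0i : 0 ≤ i) (hin : i ≤ n) (h0j : 0 ≤ j) (hjn : j ≤ n) :
    pvMget (pvFWRound (n+1).toNat g k) i j =
      min (pvMget g i j) (pvMget g i (k : Int) + pvMget g (k : Int) j) := by
  have hNI : (((n+1).toNat : Nat) : Int) = n + 1 := Int.toNat_of_nonneg (by omega)
  rw [pvFWRound, pvMget_mapmap _ _ i j h0i (by omega) h0j (by omega)]
  rw [Int.toNat_of_nonneg h0i, Int.toNat_of_nonneg h0j]

theorem pvCK_zero (n : Int) (fares : List (List Int)) (g : List (List Int))
    (hle : ∀ f ∈ fares, pvMget g (f.getD 0 0) (f.getD 1 0) ≤ f.getD 2 0 ∧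
      pvMget g (f.getD 1 0) (f.getD 0 0) ≤ f.getD 2 0) :
    pvCK n 0 fares g := by
  intro i j c m h0i hin h0j hjn hw hm
  cases m with
  | cons x t => exact absurd (hm x (by simp)) (by omega)
  | nil =>
    cases hw with
    | single he =>
      obtain ⟨f, hfm, hd, hc⟩ := he
      rcases hd with ⟨ha, hb⟩ | ⟨ha, hb⟩
      · rw [← ha, ← hb, ← hc]; exact (hle f hfm).1
      · rw [← ha, ← hb, ← hc]; exact (hle f hfm).2

theorem pvRound_spec (n : Int) (fares : List (List Int)) (k : Nat) (g : List (List Int))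
    (hn : 0 ≤ n) (hkn : (k : Int) ≤ n)
    (hQ : pvQ n fares g) (hck : pvCK n k fares g) :
    pvQ n fares (pvFWRound (n+1).toNat g k) ∧ pvCK n (k+1) fares (pvFWRound (n+1).toNat g k) := by
  have hk0 : (0 : Int) ≤ (k : Int) := by positivity
  have hround := pvMget_round n hn g k
  have hQ2 : pvQ n fares (pvFWRound (n+1).toNat g k) := by
    refine ⟨pvShape_mapmap _ _, ?_, ?_, ?_⟩
    · intro i j h1 h2 h3 h4
      rw [hround i j h1 h2 h3 h4]
      have b1 := hQ.bnd i j h1 h2 h3 h4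
      have b2 := hQ.bnd i (k : Int) h1 h2 hk0 hkn
      have b3 := hQ.bnd (k : Int) j hk0 hkn h3 h4
      constructor
      · exact le_min b1.1 (by omega)
      · exact le_trans (min_le_left _ _) b1.2
    · intro i h1 h2
      rw [hround i i h1 h2 h1 h2, hQ.diag i h1 h2]
      have b2 := hQ.bnd i (k : Int) h1 h2 hk0 hkn
      have b3 := hQ.bnd (k : Int) i hk0 hkn h1 h2
      exact min_eq_left (by omega)
    · intro i j h1 h2 h3 h4
      rw [hround i j h1 h2 h3 h4]
      rcases le_or_gt (pvMget g i j) (pvMget g i (k : Int) + pvMget g (k : Int) j) with h | h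
      · rw [min_eq_left h]
        exact hQ.rep i j h1 h2 h3 h4
      · rw [min_eq_right (le_of_lt h)]
        have b1 := hQ.bnd i j h1 h2 h3 h4
        have b2 := hQ.bnd i (k : Int) h1 h2 hk0 hkn
        have b3 := hQ.bnd (k : Int) j hk0 hkn h3 h4
        rcases hQ.rep i (k : Int) h1 h2 hk0 hkn with hik | hik | ⟨m1, hw1⟩
        · exfalso; omega
        · exfalso
          rw [hik, hQ.diag (k : Int) hk0 hkn, zero_add] at h
          omega
        · rcases hQ.rep (k : Int) j hk0 hkn h3 h4 with hkj | hkj | ⟨m2, hw2⟩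
          · exfalso; omega
          · rw [← hkj, hQ.diag (k : Int) hk0 hkn, add_zero]
            exact Or.inr (Or.inr ⟨m1, hw1⟩)
          · exact Or.inr (Or.inr ⟨m1 ++ (k : Int) :: m2, pvWalk_append hw1 hw2⟩)
  refine ⟨hQ2, ?_⟩
  have main : ∀ (L : Nat) (i j c : Int) (m : List Int), m.length ≤ L →
      0 ≤ i → i ≤ n → 0 ≤ j → j ≤ n → pvWalk fares i m j c →
      (∀ x ∈ m, 0 ≤ x ∧ x < ((k : Nat) : Int) + 1) →
      pvMget (pvFWRound (n+1).toNat g k) i j ≤ c := by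
    intro L
    induction L with
    | zero =>
      intro i j c m hlen h1 h2 h3 h4 hw hm
      have : m = [] := List.eq_nil_of_length_eq_zero (by omega)
      subst this
      rw [hround i j h1 h2 h3 h4]
      exact le_trans (min_le_left _ _) (hck i j c [] h1 h2 h3 h4 hw (by simp))
    | succ L ihL =>
      intro i j c m hlen h1 h2 h3 h4 hw hm
      by_cases hkm : (k : Int) ∈ m
      · obtain ⟨m1, m2, rfl, hknot⟩ := pvMem_split_last hkm
        obtain ⟨c1, c2, hw1, hw2, rfl⟩ := pvWalk_split hw
        have hlen1 : m1.length ≤ L := by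
          simp [List.length_append] at hlen; omega
        have h1' : pvMget (pvFWRound (n+1).toNat g k) i (k : Int) ≤ c1 :=
          ihL i (k : Int) c1 m1 hlen1 h1 h2 hk0 hkn hw1
            (fun x hx => hm x (by simp [hx]))
        have hik : pvMget g i (k : Int) ≤ c1 := by
          rw [hround i (k : Int) h1 h2 hk0 hkn, hQ.diag (k : Int) hk0 hkn, add_zero,
              min_self] at h1'
          exact h1'
        have hkj : pvMget g (k : Int) j ≤ c2 := by
          refine hck (k : Int) j c2 m2 hk0 hkn h3 h4 hw2 ?_
          intro x hx
          have := hm x (by simp [hx])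
          have hne : x ≠ (k : Int) := fun h => hknot (h ▸ hx)
          omega
        calc pvMget (pvFWRound (n+1).toNat g k) i j
            ≤ pvMget g i (k : Int) + pvMget g (k : Int) j := by
              rw [hround i j h1 h2 h3 h4]; exact min_le_right _ _
          _ ≤ c1 + c2 := add_le_add hik hkj
      · rw [hround i j h1 h2 h3 h4]
        refine le_trans (min_le_left _ _) (hck i j c m h1 h2 h3 h4 hw ?_)
        intro x hx
        have := hm x hx
        have hne : x ≠ (k : Int) := fun h => hkm (h ▸ hx)
        omega
  intro i j c m h1 h2 h3 h4 hw hm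
  refine main m.length i j c m (le_refl _) h1 h2 h3 h4 hw ?_
  intro x hx
  have := hm x hx
  constructor
  · exact this.1
  · push_cast at this ⊢
    omega

theorem pvFW_fold (n : Int) (fares : List (List Int)) (hn : 0 ≤ n)
    (g1 : List (List Int)) (hQ1 : pvQ n fares g1) (hck1 : pvCK n 0 fares g1) :
    ∀ m : Nat, m ≤ (n+1).toNat →
      pvQ n fares ((List.range m).foldl (pvFWRound (n+1).toNat) g1) ∧
      pvCK n m fares ((List.range m).foldl (pvFWRound (n+1).toNat) g1) := by
  intro m
  induction m with
  | zero => intro _; simpa using ⟨hQ1, hck1⟩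
  | succ m ih =>
    intro hm
    obtain ⟨hQ, hck⟩ := ih (by omega)
    rw [List.range_succ, List.foldl_append, List.foldl_cons, List.foldl_nil]
    have hNI : (((n+1).toNat : Nat) : Int) = n + 1 := Int.toNat_of_nonneg (by omega)
    exact pvRound_spec n fares m _ hn (by omega) hQ hck

theorem pvPointwise (n start : Int) (fares : List (List Int)) (adj : List (List (Int × Int)))
    (g : List (List Int)) (hn : 0 ≤ n) (hstart : 0 ≤ start ∧ start ≤ n) (hfb : pvFB n fares)
    (hadjN : ∀ u v c : Int, 0 ≤ u → ((v, c) ∈ pvSigL n (pvAget adj u) ↔ pvE fares u v c))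
    (hadjV : ∀ u : Int, 0 ≤ u → ∀ vc ∈ pvAget adj u, -(n+1) ≤ vc.1 ∧ vc.1 ≤ n)
    (hadjlen : adj.length = (n+1).toNat)
    (hQ : pvQ n fares g) (hckA : pvCK n (n+1).toNat fares g) :
    ∀ v : Int, 0 ≤ v → v ≤ n →
      pvDget (pvDijk adj start (List.replicate (n+1).toNat 987654321)) v = pvMget g start v := by
  have hfin := pvDijk_spec n start fares adj hn hstart hfb hadjN hadjV hadjlen
  have hNI : (((n+1).toNat : Nat) : Int) = n + 1 := Int.toNat_of_nonneg (by omega)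
  intro v hv0 hvn
  apply le_antisymm
  · rcases hQ.rep start v hstart.1 hstart.2 hv0 hvn with hINF | heq | ⟨m, hw⟩
    · rw [hINF]
      exact (hfin.fs.bnd v hv0).2
    · rw [← heq, hfin.fs.hst, hQ.diag start hstart.1 hstart.2]
    · exact pvDFinal_le_walk_start hfin hw
  · rcases hfin.fs.rep v hv0 hvn with hINF | heq | ⟨m, hw⟩
    · rw [hINF]
      exact (hQ.bnd start v hstart.1 hstart.2 hv0 hvn).2
    · rw [heq, hfin.fs.hst, hQ.diag start hstart.1 hstart.2]
    · refine hckA start v _ m hstart.1 hstart.2 hv0 hvn hw ?_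
      intro x hx
      have := (pvWalk_bounds hfb hw).2.2.1 x hx
      omega

theorem pvFold_eq : ∀ (l : List Int) (F G : Int → Int) (init : Int), (∀ x ∈ l, F x = G x) →
    l.foldl (fun ans node => if F node < ans then F node else ans) init =
    l.foldl (fun ans node => min ans (G node)) init := by
  intro l
  induction l with
  | nil => intro F G init _; rfl
  | cons x t ih =>
    intro F G init hFG
    simp only [List.foldl_cons]
    have h1 : F x = G x := hFG x (by simp)
    have h2 : (if F x < init then F x else init) = min init (G x) := by
      rw [h1, min_def]
      split_ifs <;> omega
    rw [h2]
    exact ih F G _ (fun y hy => hFG y (by simp [hy]))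

-- ===== the raw init fold equals the init fold of the normalized fares =====

theorem pvMrow_norm (n : Int) (hn : 0 ≤ n) (g : List (List Int))
    (hlen : g.length = (n+1).toNat) (x : Int) (h1 : -(n+1) ≤ x) (_h2 : x ≤ n) :
    PySem.List.pyGetD g x [] = PySem.List.pyGetD g (pvNorm n x) [] := by
  unfold pvNorm
  split_ifs with h
  · have hNI : (((n+1).toNat : Nat) : Int) = n + 1 := Int.toNat_of_nonneg (by omega)
    have := pvGetD_wrap g [] x (by rw [hlen]; omega) h
    rw [hlen, hNI] at this
    exact this
  · rfl

theorem pvMget_norm2 (n : Int) (hn : 0 ≤ n) (g : List (List Int))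
    (hs : pvShape (n+1).toNat g) (x y : Int)
    (hx1 : -(n+1) ≤ x) (hx2 : x ≤ n) (hy1 : -(n+1) ≤ y) (hy2 : y ≤ n) :
    pvMget g x y = pvMget g (pvNorm n x) (pvNorm n y) := by
  have hNI : (((n+1).toNat : Nat) : Int) = n + 1 := Int.toNat_of_nonneg (by omega)
  obtain ⟨hn0, hnn⟩ := pvNorm_nonneg n x hx1 hx2
  rw [pvMget, pvMget, pvMrow_norm n hn g hs.1 x hx1 hx2]
  have hrl : (PySem.List.pyGetD g (pvNorm n x) []).length = (n+1).toNat :=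
    pvRow_len hs (pvNorm n x) hn0 (by omega)
  exact pvDget_norm n hn _ hrl y hy1 hy2

theorem pvMset_norm2 (n : Int) (hn : 0 ≤ n) (g : List (List Int))
    (hs : pvShape (n+1).toNat g) (x y v : Int)
    (hx1 : -(n+1) ≤ x) (hx2 : x ≤ n) (hy1 : -(n+1) ≤ y) (hy2 : y ≤ n) :
    pvMset g x y v = pvMset g (pvNorm n x) (pvNorm n y) v := by
  have hNI : (((n+1).toNat : Nat) : Int) = n + 1 := Int.toNat_of_nonneg (by omega)
  obtain ⟨hn0, hnn⟩ := pvNorm_nonneg n x hx1 hx2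
  rw [pvMset, pvMset, pvMrow_norm n hn g hs.1 x hx1 hx2,
      pvSetD_norm n hn g _ hs.1 x hx1 hx2]
  have hrl : (PySem.List.pyGetD g (pvNorm n x) []).length = (n+1).toNat :=
    pvRow_len hs (pvNorm n x) hn0 (by omega)
  rw [pvSetD_norm n hn _ v hrl y hy1 hy2]

theorem pvInitStep_norm (n : Int) (hn : 0 ≤ n) (g : List (List Int))
    (hs : pvShape (n+1).toNat g) (f : List Int)
    (h0a : -(n+1) ≤ f.getD 0 0) (h0b : f.getD 0 0 ≤ n)
    (h1a : -(n+1) ≤ f.getD 1 0) (h1b : f.getD 1 0 ≤ n) :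
    pvInitStep g f =
      pvInitStep g [pvNorm n (f.getD 0 0), pvNorm n (f.getD 1 0), f.getD 2 0] := by
  rw [pvInitStep, pvInitStep]
  rw [pvDget0, pvDget1, pvDget2, pvDget0, pvDget1, pvDget2]
  simp only [List.getD_cons_zero, List.getD_cons_succ]
  rw [pvMget_norm2 n hn g hs _ _ h0a h0b h1a h1b]
  split_ifs with h
  · obtain ⟨hn00, hn0n⟩ := pvNorm_nonneg n (f.getD 0 0) h0a h0b
    obtain ⟨hn10, hn1n⟩ := pvNorm_nonneg n (f.getD 1 0) h1a h1b
    rw [pvMset_norm2 n hn g hs _ _ (f.getD 2 0) h0a h0b h1a h1b]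
    have hs2 : pvShape (n+1).toNat (pvMset g (pvNorm n (f.getD 0 0)) (pvNorm n (f.getD 1 0)) (f.getD 2 0)) := by
      apply pvShape_mset hs _ _ _ hn00
      have hNI : (((n+1).toNat : Nat) : Int) = n + 1 := Int.toNat_of_nonneg (by omega)
      omega
    rw [pvMset_norm2 n hn _ hs2 _ _ (f.getD 2 0) h1a h1b h0a h0b]
  · rfl

theorem pvInitFold_norm (n : Int) (hn : 0 ≤ n) :
    ∀ (l : List (List Int)) (g : List (List Int)), pvFBraw n l → pvShape (n+1).toNat g →
      l.foldl pvInitStep g = (pvNF n l).foldl pvInitStep g := by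
  intro l
  induction l with
  | nil => intro g _ _; rfl
  | cons f t ih =>
    intro g hfbr hs
    obtain ⟨_, h2, h3, h4, h5, _⟩ := hfbr f (by simp)
    have hNI : (((n+1).toNat : Nat) : Int) = n + 1 := Int.toNat_of_nonneg (by omega)
    obtain ⟨hn00, hn0n⟩ := pvNorm_nonneg n (f.getD 0 0) h2 h3
    obtain ⟨hn10, hn1n⟩ := pvNorm_nonneg n (f.getD 1 0) h4 h5
    simp only [pvNF, List.map_cons, List.foldl_cons]
    rw [pvInitStep_norm n hn g hs f h2 h3 h4 h5]
    have hs2 : pvShape (n+1).toNat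
        (pvInitStep g [pvNorm n (f.getD 0 0), pvNorm n (f.getD 1 0), f.getD 2 0]) := by
      rw [pvInitStep]
      split_ifs
      · rw [pvDget0, pvDget1, pvDget2]
        simp only [List.getD_cons_zero, List.getD_cons_succ]
        have hsA : pvShape (n+1).toNat (pvMset g (pvNorm n (f.getD 0 0)) (pvNorm n (f.getD 1 0)) (f.getD 2 0)) :=
          pvShape_mset hs _ _ _ hn00 (by omega)
        exact pvShape_mset hsA _ _ _ hn10 (by omega)
      · exact hs
    have := ih (pvInitStep g [pvNorm n (f.getD 0 0), pvNorm n (f.getD 1 0), f.getD 2 0])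
      (fun x hx => hfbr x (by simp [hx])) hs2
    rw [this]
    rfl

-- ===== VERDICT (by name: the statement is the Claim_ definition above) =====
theorem solution_spec : Claim_equal_solution := by
  intro n s a b fares hdom hpre
  obtain ⟨hn, hs0, hsn, ha0, han, hb0, hbn, hfbr⟩ := hpre
  have hfbr' : pvFBraw n fares := hfbr
  have hfbF : pvFB n (pvNF n fares) := pvFB_NF n fares hfbr'
  have hadjN := pvAdj_sig n fares hn hfbr'
  have hadjV := pvAdj_valid n fares hn hfbr'
  have hadjlen : (pvBuildAdj n fares).length = (n+1).toNat := by
    rw [pvBuildAdj_eq]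
    exact (pvBuildAdj_fold n hn fares (List.replicate (n+1).toNat []) hfbr' (by simp)).1
  -- the raw init fold is the init fold of the normalized fares
  have hInit : fares.foldl pvInitStep (pvG0 n) = (pvNF n fares).foldl pvInitStep (pvG0 n) :=
    pvInitFold_norm n hn fares (pvG0 n) hfbr' (pvShape_g0 n)
  obtain ⟨hQ0, hsym0⟩ := pvQ_g0 n (pvNF n fares) hn
  obtain ⟨hQ1, hsym1, hmono1, hle1⟩ :=
    pvG1_spec n (pvNF n fares) hn hfbF (pvNF n fares) (pvG0 n) (fun f hf => hf) hQ0 hsym0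
  have hck0 := pvCK_zero n (pvNF n fares) ((pvNF n fares).foldl pvInitStep (pvG0 n)) hle1
  obtain ⟨hQF, hckF⟩ := pvFW_fold n (pvNF n fares) hn
    ((pvNF n fares).foldl pvInitStep (pvG0 n)) hQ1 hck0 (n+1).toNat (le_refl _)
  have hglen : ((List.range (n+1).toNat).foldl (pvFWRound (n+1).toNat)
      ((pvNF n fares).foldl pvInitStep (pvG0 n))).length = (n+1).toNat := hQF.shape.1
  -- normalize the three start labels
  have hnorm : ∀ x : Int, -(n+1) ≤ x → x ≤ n → 0 ≤ pvNorm n x ∧ pvNorm n x ≤ n :=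
    fun x hx1 hx2 => pvNorm_nonneg n x hx1 hx2
  have hDwrap : ∀ x : Int, -(n+1) ≤ x → x ≤ n →
      pvDijk (pvBuildAdj n fares) x (List.replicate (n+1).toNat 987654321) =
      pvDijk (pvBuildAdj n fares) (pvNorm n x) (List.replicate (n+1).toNat 987654321) := by
    intro x hx1 hx2
    unfold pvNorm
    split_ifs with h
    · exact pvDijk_wrap (pvBuildAdj n fares) n hn hadjlen x hx1 h
    · rfl
  have hMwrap : ∀ x : Int, -(n+1) ≤ x → x ≤ n → ∀ j : Int,
      pvMget ((List.range (n+1).toNat).foldl (pvFWRound (n+1).toNat)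
        ((pvNF n fares).foldl pvInitStep (pvG0 n))) x j =
      pvMget ((List.range (n+1).toNat).foldl (pvFWRound (n+1).toNat)
        ((pvNF n fares).foldl pvInitStep (pvG0 n))) (pvNorm n x) j := by
    intro x hx1 hx2 j
    unfold pvNorm
    split_ifs with h
    · exact pvMget_wrap _ n hn hglen x j hx1 h
    · rfl
  have hT := pvPointwise n (pvNorm n s) (pvNF n fares) (pvBuildAdj n fares)
    ((List.range (n+1).toNat).foldl (pvFWRound (n+1).toNat) ((pvNF n fares).foldl pvInitStep (pvG0 n)))
    hn (hnorm s hs0 hsn) hfbF hadjN hadjV hadjlen hQF hckF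
  have hA := pvPointwise n (pvNorm n a) (pvNF n fares) (pvBuildAdj n fares)
    ((List.range (n+1).toNat).foldl (pvFWRound (n+1).toNat) ((pvNF n fares).foldl pvInitStep (pvG0 n)))
    hn (hnorm a ha0 han) hfbF hadjN hadjV hadjlen hQF hckF
  have hB := pvPointwise n (pvNorm n b) (pvNF n fares) (pvBuildAdj n fares)
    ((List.range (n+1).toNat).foldl (pvFWRound (n+1).toNat) ((pvNF n fares).foldl pvInitStep (pvG0 n)))
    hn (hnorm b hb0 hbn) hfbF hadjN hadjV hadjlen hQF hckF
  show solution n s a b fares = solution_alt n s a b fares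
  rw [show solution n s a b fares =
      (PySem.List.pyRange 1 (n+1) 1).foldl
        (fun answer node =>
          if (fun node => pvDget (pvDijk (pvBuildAdj n fares) s (List.replicate (n+1).toNat 987654321)) node +
              pvDget (pvDijk (pvBuildAdj n fares) a (List.replicate (n+1).toNat 987654321)) node +
              pvDget (pvDijk (pvBuildAdj n fares) b (List.replicate (n+1).toNat 987654321)) node) node < answer then
            (fun node => pvDget (pvDijk (pvBuildAdj n fares) s (List.replicate (n+1).toNat 987654321)) node +
              pvDget (pvDijk (pvBuildAdj n fares) a (List.replicate (n+1).toNat 987654321)) node +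
              pvDget (pvDijk (pvBuildAdj n fares) b (List.replicate (n+1).toNat 987654321)) node) node
          else answer) 987654321 from rfl]
  rw [show solution_alt n s a b fares =
      (PySem.List.pyRange 1 (n+1) 1).foldl
        (fun ans node => min ans ((fun node =>
          pvMget ((List.range (n+1).toNat).foldl (pvFWRound (n+1).toNat) (fares.foldl pvInitStep (pvG0 n))) s node +
          pvMget ((List.range (n+1).toNat).foldl (pvFWRound (n+1).toNat) (fares.foldl pvInitStep (pvG0 n))) a node +
          pvMget ((List.range (n+1).toNat).foldl (pvFWRound (n+1).toNat) (fares.foldl pvInitStep (pvG0 n))) b node) node)) 987654321 from rfl]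
  rw [hInit]
  apply pvFold_eq
  intro x hx
  have hxr := (PySem.List.mem_pyRange_one).mp hx
  rw [hDwrap s hs0 hsn, hDwrap a ha0 han, hDwrap b hb0 hbn,
      hMwrap s hs0 hsn x, hMwrap a ha0 han x, hMwrap b hb0 hbn x,
      hT x (by omega) (by omega), hA x (by omega) (by omega), hB x (by omega) (by omega)]
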